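-- pv_equiv track=rewrite | github.com/melodist/CodingPractice | src/programmers/MCCS3_Optical Path Cycle.py | solution
-- ===== SOURCE A (Python) =====
-- from collections import deque
--
-- def solution(grid):
--     def bfs(y, x, d):
--         q = deque([(y, x, d)])
--         directions = [(0, 1), (-1, 0), (0, -1), (1, 0)]
--         while q:
--             y, x, d = q.popleft()
--
--             if grid[y][x] == "L":
--                 nd = (d + 1) % 4
--             elif grid[y][x] == "R":
--                 nd = (d + 3) % 4
--             else:
--                 nd = d
--
--             ny = (y + directions[nd][1] + r) % r
--             nx = (x + directions[nd][0] + c) % c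
--
--             if visited[ny][nx][nd] == -1:
--                 visited[ny][nx][nd] = visited[y][x][d] + 1
--                 q.append((ny, nx, nd))
--             else:
--                 return visited[y][x][d]
--
--     r = len(grid)
--     c = len(grid[0])
--     visited = [[[-1] * 4 for _ in range(c)] for _ in range(r)]
--     answer = []
--
--     for i in range(r):
--         for j in range(c):
--             for d in range(4):
--                 if visited[i][j][d] == -1:
--                     visited[i][j][d] = 1
--                     answer.append(bfs(i, j, d))
--
--     return sorted(answer)
-- ===== SOURCE B (Python) =====
-- def solution(grid):
--     r, c = len(grid), len(grid[0])
--     n = 4 * r * c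
--
--     def step(s):
--         y, x, d = s // (4 * c), s // 4 % c, s % 4
--         ch = grid[y][x]
--         nd = (d + 1) % 4 if ch == "L" else (d + 3) % 4 if ch == "R" else d
--         ny = (y + (1, 0, -1, 0)[nd]) % r
--         nx = (x + (0, -1, 0, 1)[nd]) % c
--         return (ny * c + nx) * 4 + nd
--
--     # union-find over the 4*r*c beam states: union every state with its successor;
--     # attach the larger root under the smaller, so each root is its component's minimum
--     parent = list(range(n))
--     size = [1] * n
--
--     def find(a):
--         while parent[a] != a:
--             a = parent[a]
--         return a
--
--     for s in range(n):
--         ra, rb = find(s), find(step(s))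
--         if ra != rb:
--             lo, hi = min(ra, rb), max(ra, rb)
--             parent[hi] = lo
--             size[lo] += size[hi]
--
--     # the transition is a bijection, so every component is one cycle: root sizes = cycle lengths
--     return sorted(size[s] for s in range(n) if parent[s] == s)
-- ===== Notes on version B (the rewrite author's own statement) =====
-- stated objective: alternative
-- what changed: A runs a deque-based BFS per unvisited beam state over a 3-D distance array and returns the stored distance when it re-hits a visited state; B builds a disjoint-set (union-find with size tracking) over the 4*r*c beam states, unions every state with its successor, and returns the sorted sizes of the resulting components, which are exactly the cycle lengths because the beam transition is a bijection.
import Mathlib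
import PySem

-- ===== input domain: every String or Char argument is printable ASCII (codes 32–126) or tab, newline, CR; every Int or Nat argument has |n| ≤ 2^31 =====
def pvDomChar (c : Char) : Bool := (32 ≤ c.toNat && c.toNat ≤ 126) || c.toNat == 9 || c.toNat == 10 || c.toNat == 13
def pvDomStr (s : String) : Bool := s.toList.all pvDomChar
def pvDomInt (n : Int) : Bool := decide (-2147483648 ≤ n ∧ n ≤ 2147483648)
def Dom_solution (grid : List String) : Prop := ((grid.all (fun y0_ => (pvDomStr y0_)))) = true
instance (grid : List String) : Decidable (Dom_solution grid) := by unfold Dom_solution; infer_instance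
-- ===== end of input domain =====

-- B replaces A's per-cell BFS over a 3-D distance array by a union-find (disjoint set with
-- size tracking) over the 4·r·c beam states: each state is unioned with its successor, and
-- the sorted component sizes are the cycle lengths (the transition is a bijection).
-- Alternative algorithm, same result; equivalence is about the return value.

-- ===== PORT A =====
-- grid[y][x] (always in range under Pre_solution; exact there)
def pvAGridAt (grid : List String) (y x : Int) : Char :=
  PySem.List.pyGetD (PySem.List.pyGetD grid y "").toList x ' '

def pvDirs : List (Int × Int) := [(0, 1), (-1, 0), (0, -1), (1, 0)]

-- visited[y][x][d] read / write (indices always in range under Pre_solution; exact there)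
def pvVget (v : List (List (List Int))) (y x d : Int) : Int :=
  (((v.getD y.toNat []).getD x.toNat []).getD d.toNat (-1))

def pvVset (v : List (List (List Int))) (y x d : Int) (a : Int) : List (List (List Int)) :=
  v.modify y.toNat (fun row => row.modify x.toNat (fun cell => cell.set d.toNat a))

-- the `while q` loop of A's bfs; fuel 4*r*c+1 suffices (each iteration marks a fresh state)
def pvBfs (grid : List String) (r c : Int) :
    Nat → List (Int × Int × Int) → List (List (List Int)) → Int × List (List (List Int))
  | 0, _, v => (0, v)
  | _ + 1, [], v => (0, v)      -- Python would return None; unreachable (q never empties)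
  | fuel + 1, (y, x, d) :: q, v =>
      let ch := pvAGridAt grid y x
      let nd := if ch = 'L' then PySem.Int.mod (d + 1) 4
                else if ch = 'R' then PySem.Int.mod (d + 3) 4 else d
      let ny := PySem.Int.mod (y + (PySem.List.pyGetD pvDirs nd (0, 0)).2 + r) r
      let nx := PySem.Int.mod (x + (PySem.List.pyGetD pvDirs nd (0, 0)).1 + c) c
      if pvVget v ny nx nd = -1 then
        pvBfs grid r c fuel (q ++ [(ny, nx, nd)]) (pvVset v ny nx nd (pvVget v y x d + 1))
      else (pvVget v y x d, v)

def solution (grid : List String) : List Int :=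
  let r : Int := PySem.List.len grid
  let c : Int := PySem.Str.len (PySem.List.pyGetD grid 0 "")
  let v0 : List (List (List Int)) :=
    List.replicate r.toNat (List.replicate c.toNat (List.replicate 4 (-1 : Int)))
  let res := (PySem.List.pyRange 0 r 1).foldl (fun st i =>
      (PySem.List.pyRange 0 c 1).foldl (fun st j =>
        (PySem.List.pyRange 0 4 1).foldl (fun st d =>
          if pvVget st.1 i j d = -1 then
            let v1 := pvVset st.1 i j d 1
            let res := pvBfs grid r c ((4 * r * c).toNat + 1) [(i, j, d)] v1
            (res.2, st.2 ++ [res.1])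
          else st) st) st) (v0, ([] : List Int))
  PySem.List.sorted res.2 (fun x => x) false

-- ===== PORT B =====
-- Source B's step(s): the flat-encoded successor of beam state s
def pvBStep (grid : List String) (r c : Int) (s : Int) : Int :=
  let y := PySem.Int.floordiv s (4 * c)
  let x := PySem.Int.mod (PySem.Int.floordiv s 4) c
  let d := PySem.Int.mod s 4
  let ch := PySem.List.pyGetD (PySem.List.pyGetD grid y "").toList x ' '   -- grid[y][x]
  let nd := if ch = 'L' then PySem.Int.mod (d + 1) 4
            else if ch = 'R' then PySem.Int.mod (d + 3) 4 else d
  let ny := PySem.Int.mod (y + PySem.List.pyGetD ([1, 0, -1, 0] : List Int) nd 0) r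
  let nx := PySem.Int.mod (x + PySem.List.pyGetD ([0, -1, 0, 1] : List Int) nd 0) c
  (ny * c + nx) * 4 + nd

-- Source B's find: `while parent[a] != a: a = parent[a]`; ported with fuel n = 4*r*c, which
-- suffices in every reachable call because parent[a] ≤ a always holds in Source B's run
def pvFind (parent : List Int) : Nat → Int → Int
  | 0, a => a
  | fuel + 1, a =>
      if PySem.List.pyGetD parent a 0 = a then a
      else pvFind parent fuel (PySem.List.pyGetD parent a 0)

def solution_alt (grid : List String) : List Int :=
  let r : Int := PySem.List.len grid
  let c : Int := PySem.Str.len (PySem.List.pyGetD grid 0 "")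
  let n : Int := 4 * r * c
  let st := (PySem.List.pyRange 0 n 1).foldl (fun (st : List Int × List Int) s =>
      let ra := pvFind st.1 n.toNat s
      let rb := pvFind st.1 n.toNat (pvBStep grid r c s)
      if ra = rb then st
      else
        let lo := min ra rb
        let hi := max ra rb
        (PySem.List.pySetD st.1 hi lo,
         PySem.List.pySetD st.2 lo (PySem.List.pyGetD st.2 lo 0 + PySem.List.pyGetD st.2 hi 0)))
    (PySem.List.pyRange 0 n 1, List.replicate n.toNat (1 : Int))
  PySem.List.sorted (((PySem.List.pyRange 0 n 1).filter
      (fun s => PySem.List.pyGetD st.1 s 0 == s)).map (fun s => PySem.List.pyGetD st.2 s 0))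
    (fun x => x) false

-- ===== PRECONDITION & SPEC =====
-- Pre_ excludes exactly the inputs where A raises: the empty grid (IndexError on grid[0])
-- and ragged grids with a row shorter than row 0 (IndexError on grid[y][x]).
def Pre_solution (grid : List String) : Prop :=
  grid ≠ [] ∧ ∀ s ∈ grid, PySem.Str.len grid.headI ≤ PySem.Str.len s
instance (grid : List String) : Decidable (Pre_solution grid) := by
  unfold Pre_solution; infer_instance

def pvWitness_solution : List String := ["SL", "LR"]

def Spec_solution (grid : List String) (out : List Int) : Prop := out = solution_alt grid
instance (grid : List String) (out : List Int) : Decidable (Spec_solution grid out) := by unfold Spec_solution; infer_instance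

-- ===== CLAIM (what is proved, stated in full; the proofs are below) =====
def Claim_equal_solution : Prop := ∀ (grid : List String), Dom_solution grid → Pre_solution grid → Spec_solution grid (solution grid)

-- ===== LEMMAS AND PROOFS =====

-- ============ shared arithmetic / list helpers ============
theorem euc_div (a b q ρ : Int) (hb : 0 < b) (h : a = q*b + ρ) (h0 : 0 ≤ ρ) (h1 : ρ < b) : a / b = q := by
  subst h; rw [add_comm, Int.add_mul_ediv_right _ _ (by omega : b ≠ 0), Int.ediv_eq_zero_of_lt h0 h1]; ring
theorem euc_mod (a b q ρ : Int) (hb : 0 < b) (h : a = q*b + ρ) (h0 : 0 ≤ ρ) (h1 : ρ < b) : a % b = ρ := by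
  subst h; rw [add_comm, mul_comm, Int.add_mul_emod_self_left]; exact Int.emod_eq_of_lt h0 h1

theorem getD_modify {α : Type} (l : List α) (i j : Nat) (f : α → α) (d : α) :
    (l.modify i f).getD j d = if i = j ∧ j < l.length then f (l.getD j d) else l.getD j d := by
  rw [List.getD_eq_getElem?_getD, List.getD_eq_getElem?_getD, List.getElem?_modify]
  by_cases h1 : i = j
  · subst h1
    by_cases h2 : i < l.length
    · simp [List.getElem?_eq_getElem h2, h2]
    · simp [List.getElem?_eq_none_iff.2 (Nat.le_of_not_lt h2), h2]
  · simp [h1]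

theorem getD_set {α : Type} (l : List α) (i j : Nat) (a d : α) :
    (l.set i a).getD j d = if i = j ∧ j < l.length then a else l.getD j d := by
  rw [List.getD_eq_getElem?_getD, List.getD_eq_getElem?_getD, List.getElem?_set]
  by_cases h1 : i = j
  · subst h1
    by_cases h2 : i < l.length
    · simp [h2]
    · simp [List.getElem?_eq_none_iff.2 (Nat.le_of_not_lt h2), h2]
  · simp [h1]

def rOf (grid : List String) : Int := PySem.List.len grid
def cOf (grid : List String) : Int := PySem.Str.len (PySem.List.pyGetD grid 0 "")
def nOf (grid : List String) : Int := 4 * rOf grid * cOf grid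
def stF (grid : List String) : Int → Int := pvBStep grid (rOf grid) (cOf grid)
def encS (grid : List String) (y x d : Int) : Int := (y * cOf grid + x) * 4 + d
def ValidT (grid : List String) (y x d : Int) : Prop :=
  0 ≤ y ∧ y < rOf grid ∧ 0 ≤ x ∧ x < cOf grid ∧ 0 ≤ d ∧ d < 4
def InSt (grid : List String) (s : Int) : Prop := 0 ≤ s ∧ s < nOf grid

-- A's in-loop step, factored for the proofs (pvBfs_cons below is rfl)
def aDir (grid : List String) (y x d : Int) : Int :=
  if pvAGridAt grid y x = 'L' then PySem.Int.mod (d + 1) 4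
  else if pvAGridAt grid y x = 'R' then PySem.Int.mod (d + 3) 4 else d

def aStep (grid : List String) (r c y x d : Int) : Int × Int × Int :=
  (PySem.Int.mod (y + (PySem.List.pyGetD pvDirs (aDir grid y x d) (0, 0)).2 + r) r,
   PySem.Int.mod (x + (PySem.List.pyGetD pvDirs (aDir grid y x d) (0, 0)).1 + c) c,
   aDir grid y x d)

theorem pvBfs_cons (grid : List String) (r c : Int) (fuel : Nat) (y x d : Int)
    (q : List (Int × Int × Int)) (v : List (List (List Int))) :
    pvBfs grid r c (fuel + 1) ((y, x, d) :: q) v =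
      (if pvVget v (aStep grid r c y x d).1 (aStep grid r c y x d).2.1 (aStep grid r c y x d).2.2 = -1 then
        pvBfs grid r c fuel (q ++ [aStep grid r c y x d])
          (pvVset v (aStep grid r c y x d).1 (aStep grid r c y x d).2.1 (aStep grid r c y x d).2.2
            (pvVget v y x d + 1))
      else (pvVget v y x d, v)) := by
  show (let ch := pvAGridAt grid y x; _) = _
  simp only [pvBfs, aStep, aDir]

theorem dirAgree (nd : Int) (h0 : 0 ≤ nd) (h1 : nd < 4) :
    PySem.List.pyGetD ([1, 0, -1, 0] : List Int) nd 0 = (PySem.List.pyGetD pvDirs nd (0, 0)).2 ∧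
    PySem.List.pyGetD ([0, -1, 0, 1] : List Int) nd 0 = (PySem.List.pyGetD pvDirs nd (0, 0)).1 := by
  interval_cases nd <;> constructor <;> rfl

theorem mod_add_self (a b : Int) (hb : 0 < b) :
    PySem.Int.mod (a + b) b = PySem.Int.mod a b := by
  rw [PySem.Int.mod_eq_emod_of_pos hb, PySem.Int.mod_eq_emod_of_pos hb, Int.add_emod_right]

theorem aDir_bounds (grid : List String) (y x d : Int) (hd0 : 0 ≤ d) (hd1 : d < 4) :
    0 ≤ aDir grid y x d ∧ aDir grid y x d < 4 := by
  unfold aDir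
  split_ifs
  · exact ⟨PySem.Int.mod_nonneg _ (by norm_num), PySem.Int.mod_lt _ (by norm_num)⟩
  · exact ⟨PySem.Int.mod_nonneg _ (by norm_num), PySem.Int.mod_lt _ (by norm_num)⟩
  · exact ⟨hd0, hd1⟩

theorem aStep_valid (grid : List String) (y x d : Int)
    (hr : 0 < rOf grid) (hc : 0 < cOf grid) (hd0 : 0 ≤ d) (hd1 : d < 4) :
    ValidT grid (aStep grid (rOf grid) (cOf grid) y x d).1
      (aStep grid (rOf grid) (cOf grid) y x d).2.1
      (aStep grid (rOf grid) (cOf grid) y x d).2.2 := by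
  obtain ⟨h0, h1⟩ := aDir_bounds grid y x d hd0 hd1
  exact ⟨PySem.Int.mod_nonneg _ hr, PySem.Int.mod_lt _ hr,
    PySem.Int.mod_nonneg _ hc, PySem.Int.mod_lt _ hc, h0, h1⟩

theorem stF_encS (grid : List String) (y x d : Int) (hv : ValidT grid y x d) :
    stF grid (encS grid y x d) =
      encS grid (aStep grid (rOf grid) (cOf grid) y x d).1
        (aStep grid (rOf grid) (cOf grid) y x d).2.1
        (aStep grid (rOf grid) (cOf grid) y x d).2.2 := by
  obtain ⟨hy0, hy1, hx0, hx1, hd0, hd1⟩ := hv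
  have hc : (0:Int) < cOf grid := by omega
  have h4c : (0:Int) < 4 * cOf grid := by omega
  have hdecy : PySem.Int.floordiv ((y * cOf grid + x) * 4 + d) (4 * cOf grid) = y := by
    rw [PySem.Int.floordiv_eq_ediv_of_pos h4c]
    exact euc_div _ (4 * cOf grid) y (4 * x + d) h4c (by ring) (by omega) (by omega)
  have hdec4 : PySem.Int.floordiv ((y * cOf grid + x) * 4 + d) 4 = y * cOf grid + x := by
    rw [PySem.Int.floordiv_eq_ediv_of_pos (by norm_num)]
    exact euc_div _ 4 (y * cOf grid + x) d (by norm_num) (by ring) (by omega) (by omega)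
  have hdecx : PySem.Int.mod (y * cOf grid + x) (cOf grid) = x := by
    rw [PySem.Int.mod_eq_emod_of_pos hc]
    exact euc_mod _ (cOf grid) y x hc (by ring) (by omega) (by omega)
  have hdecd : PySem.Int.mod ((y * cOf grid + x) * 4 + d) 4 = d := by
    rw [PySem.Int.mod_eq_emod_of_pos (by norm_num)]
    exact euc_mod _ 4 (y * cOf grid + x) d (by norm_num) (by ring) (by omega) (by omega)
  obtain ⟨hnd0, hnd1⟩ := aDir_bounds grid y x d hd0 hd1
  obtain ⟨e1, e2⟩ := dirAgree (aDir grid y x d) hnd0 hnd1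
  show pvBStep grid (rOf grid) (cOf grid) ((y * cOf grid + x) * 4 + d) = _
  unfold pvBStep
  simp only [hdecy, hdec4, hdecx, hdecd]
  have hch : PySem.List.pyGetD (PySem.List.pyGetD grid y "").toList x ' ' = pvAGridAt grid y x := rfl
  rw [hch]
  show (PySem.Int.mod (y + PySem.List.pyGetD ([1, 0, -1, 0] : List Int) (aDir grid y x d) 0) (rOf grid) * cOf grid +
        PySem.Int.mod (x + PySem.List.pyGetD ([0, -1, 0, 1] : List Int) (aDir grid y x d) 0) (cOf grid)) * 4 +
        aDir grid y x d = _
  rw [e1, e2, ← mod_add_self (y + (PySem.List.pyGetD pvDirs (aDir grid y x d) (0, 0)).2) _ (by omega),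
    ← mod_add_self (x + (PySem.List.pyGetD pvDirs (aDir grid y x d) (0, 0)).1) _ hc]
  rfl

theorem enc_dec (grid : List String) (y x d : Int) (hv : ValidT grid y x d) :
    (encS grid y x d) / (4 * cOf grid) = y ∧ ((encS grid y x d) / 4) % (cOf grid) = x ∧
      (encS grid y x d) % 4 = d := by
  obtain ⟨hy0, hy1, hx0, hx1, hd0, hd1⟩ := hv
  have hc : (0:Int) < cOf grid := by omega
  refine ⟨euc_div _ (4 * cOf grid) y (4 * x + d) (by omega) (by unfold encS; ring) (by omega) (by omega), ?_, ?_⟩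
  · rw [euc_div _ 4 (y * cOf grid + x) d (by norm_num) (by unfold encS; ring) (by omega) (by omega)]
    exact euc_mod _ (cOf grid) y x hc (by ring) (by omega) (by omega)
  · exact euc_mod _ 4 (y * cOf grid + x) d (by norm_num) (by unfold encS; ring) (by omega) (by omega)

theorem encS_inSt (grid : List String) (y x d : Int) (hv : ValidT grid y x d) :
    InSt grid (encS grid y x d) := by
  obtain ⟨hy0, hy1, hx0, hx1, hd0, hd1⟩ := hv
  constructor
  · unfold encS; nlinarith
  · unfold encS nOf
    nlinarith [mul_le_mul_of_nonneg_right (by omega : y ≤ rOf grid - 1) (by omega : (0:Int) ≤ cOf grid)]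

theorem decompose (grid : List String) (s : Int) (hs : InSt grid s) (hc : 0 < cOf grid) :
    ∃ y x d, ValidT grid y x d ∧ s = encS grid y x d := by
  obtain ⟨hs0, hs1⟩ := hs
  have hr : 0 < rOf grid := by
    by_contra h
    have : nOf grid ≤ 0 := by unfold nOf; nlinarith
    omega
  refine ⟨(s / 4) / cOf grid, (s / 4) % cOf grid, s % 4, ⟨?_, ?_, ?_, ?_, ?_, ?_⟩, ?_⟩
  · exact Int.ediv_nonneg (Int.ediv_nonneg hs0 (by norm_num)) (le_of_lt hc)
  · have h1 : s / 4 < rOf grid * cOf grid := by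
      rw [Int.ediv_lt_iff_lt_mul (by norm_num)]
      unfold nOf at hs1; nlinarith
    rw [Int.ediv_lt_iff_lt_mul hc]
    nlinarith
  · exact Int.emod_nonneg _ (by omega)
  · exact Int.emod_lt_of_pos _ hc
  · exact Int.emod_nonneg _ (by norm_num)
  · exact Int.emod_lt_of_pos _ (by norm_num)
  · have e1 := Int.emod_add_ediv (s / 4) (cOf grid)
    have e2 := Int.emod_add_ediv s 4
    unfold encS
    rw [show s / 4 / cOf grid * cOf grid = cOf grid * (s / 4 / cOf grid) from mul_comm _ _]
    linarith

-- explicit left inverse of the successor map (proof-side only)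
def gInv (grid : List String) (t : Int) : Int :=
  let nd := t % 4
  let ny := t / (4 * cOf grid)
  let nx := (t / 4) % cOf grid
  let y := (ny - (PySem.List.pyGetD pvDirs nd (0, 0)).2) % rOf grid
  let x := (nx - (PySem.List.pyGetD pvDirs nd (0, 0)).1) % cOf grid
  let d := if pvAGridAt grid y x = 'L' then (nd + 3) % 4
           else if pvAGridAt grid y x = 'R' then (nd + 1) % 4 else nd
  (y * cOf grid + x) * 4 + d

theorem recover_coord (a dy b : Int) (hb : 0 < b) (h0 : 0 ≤ a) (h1 : a < b) :
    ((a + dy) % b - dy) % b = a := by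
  rw [Int.sub_emod, Int.emod_emod_of_dvd _ dvd_rfl, ← Int.sub_emod]
  simpa using Int.emod_eq_of_lt h0 h1

theorem gInv_stF (grid : List String) (y x d : Int) (hv : ValidT grid y x d) :
    gInv grid (stF grid (encS grid y x d)) = encS grid y x d := by
  obtain ⟨hy0, hy1, hx0, hx1, hd0, hd1⟩ := hv
  have hr : 0 < rOf grid := by omega
  have hc : (0:Int) < cOf grid := by omega
  rw [stF_encS grid y x d ⟨hy0, hy1, hx0, hx1, hd0, hd1⟩]
  have hval := aStep_valid grid y x d hr hc hd0 hd1
  obtain ⟨e1, e2, e3⟩ := enc_dec grid _ _ _ hval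
  unfold gInv
  simp only [e1, e2, e3]
  simp only [aStep]
  rw [mod_add_self (y + (PySem.List.pyGetD pvDirs (aDir grid y x d) (0, 0)).2) _ hr,
    mod_add_self (x + (PySem.List.pyGetD pvDirs (aDir grid y x d) (0, 0)).1) _ hc,
    PySem.Int.mod_eq_emod_of_pos hr, PySem.Int.mod_eq_emod_of_pos hc,
    recover_coord y ((PySem.List.pyGetD pvDirs (aDir grid y x d) (0, 0)).2) _ hr hy0 hy1,
    recover_coord x ((PySem.List.pyGetD pvDirs (aDir grid y x d) (0, 0)).1) _ hc hx0 hx1]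
  unfold encS
  congr 1
  unfold aDir
  have m1 : PySem.Int.mod (d + 1) 4 = (d + 1) % 4 := PySem.Int.mod_eq_emod_of_pos (by norm_num)
  have m3 : PySem.Int.mod (d + 3) 4 = (d + 3) % 4 := PySem.Int.mod_eq_emod_of_pos (by norm_num)
  split_ifs <;> (try rw [m1]) <;> (try rw [m3]) <;> omega

theorem gInv_stF' (grid : List String) (s : Int) (hc : 0 < cOf grid) (hs : InSt grid s) :
    gInv grid (stF grid s) = s := by
  obtain ⟨y, x, d, hv, rfl⟩ := decompose grid s hs hc
  exact gInv_stF grid y x d hv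

theorem stF_inSt (grid : List String) (s : Int) (hc : 0 < cOf grid) (hs : InSt grid s) :
    InSt grid (stF grid s) := by
  obtain ⟨y, x, d, hv, rfl⟩ := decompose grid s hs hc
  have hr : 0 < rOf grid := by obtain ⟨_, _, _, h, _⟩ := hv; omega
  rw [stF_encS grid y x d hv]
  exact encS_inSt grid _ _ _ (aStep_valid grid y x d hr hc hv.2.2.2.2.1 hv.2.2.2.2.2)

theorem stF_inj (grid : List String) (a b : Int) (hc : 0 < cOf grid)
    (ha : InSt grid a) (hb : InSt grid b) (h : stF grid a = stF grid b) : a = b := by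
  rw [← gInv_stF' grid a hc ha, ← gInv_stF' grid b hc hb, h]

theorem iterate_inSt (grid : List String) (s : Int) (hc : 0 < cOf grid) (hs : InSt grid s) :
    ∀ k, InSt grid ((stF grid)^[k] s) := by
  intro k
  induction k with
  | zero => simpa using hs
  | succ k ih => rw [Function.iterate_succ_apply']; exact stF_inSt grid _ hc ih

theorem iterate_cancel (grid : List String) (hc : 0 < cOf grid) :
    ∀ (k : Nat) (a b : Int), InSt grid a → InSt grid b →
      (stF grid)^[k] a = (stF grid)^[k] b → a = b := by
  intro k
  induction k with
  | zero => intro a b _ _ h; simpa using h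
  | succ k ih =>
      intro a b ha hb h
      rw [Function.iterate_succ_apply, Function.iterate_succ_apply] at h
      exact stF_inj grid a b hc ha hb
        (ih _ _ (stF_inSt grid a hc ha) (stF_inSt grid b hc hb) h)

theorem exists_return (grid : List String) (s : Int) (hc : 0 < cOf grid) (hs : InSt grid s) :
    ∃ p : Nat, 0 < p ∧ p ≤ (nOf grid).toNat ∧ (stF grid)^[p] s = s := by
  classical
  have hmap : ∀ k ∈ Finset.range ((nOf grid).toNat + 1),
      (stF grid)^[k] s ∈ Finset.Ico (0 : Int) (nOf grid) := by
    intro k _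
    obtain ⟨h0, h1⟩ := iterate_inSt grid s hc hs k
    exact Finset.mem_Ico.2 ⟨h0, h1⟩
  have hcard : (Finset.Ico (0 : Int) (nOf grid)).card < (Finset.range ((nOf grid).toNat + 1)).card := by
    rw [Int.card_Ico, Finset.card_range]
    omega
  obtain ⟨i, hi, j, hj, hne, heq⟩ :=
    Finset.exists_ne_map_eq_of_card_lt_of_maps_to hcard hmap
  rcases Nat.lt_or_ge i j with hij | hij
  · refine ⟨j - i, by omega, by simp at hi hj; omega, ?_⟩
    have : (stF grid)^[i] ((stF grid)^[j - i] s) = (stF grid)^[i] s := by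
      rw [← Function.iterate_add_apply]
      rw [show i + (j - i) = j by omega]
      exact heq.symm
    exact iterate_cancel grid hc i _ _ (iterate_inSt grid s hc hs _) hs this
  · have hij' : j < i := by omega
    refine ⟨i - j, by omega, by simp at hi hj; omega, ?_⟩
    have : (stF grid)^[j] ((stF grid)^[i - j] s) = (stF grid)^[j] s := by
      rw [← Function.iterate_add_apply]
      rw [show j + (i - j) = i by omega]
      exact heq
    exact iterate_cancel grid hc j _ _ (iterate_inSt grid s hc hs _) hs this

theorem orbit_distinct (grid : List String) (s : Int) (p : Nat) (hc : 0 < cOf grid)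
    (hs : InSt grid s) (hmin : ∀ k, 0 < k → k < p → (stF grid)^[k] s ≠ s) :
    ∀ a b : Nat, a < b → b < p → (stF grid)^[a] s ≠ (stF grid)^[b] s := by
  intro a b hab hbp h
  have : (stF grid)^[a] ((stF grid)^[b - a] s) = (stF grid)^[a] s := by
    rw [← Function.iterate_add_apply, show a + (b - a) = b by omega]
    exact h.symm
  exact hmin (b - a) (by omega) (by omega)
    (iterate_cancel grid hc a _ _ (iterate_inSt grid s hc hs _) hs this)

theorem encS_inj (grid : List String) (y x d y' x' d' : Int) (hv : ValidT grid y x d)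
    (hv' : ValidT grid y' x' d') (h : encS grid y x d = encS grid y' x' d') :
    y = y' ∧ x = x' ∧ d = d' := by
  obtain ⟨e1, e2, e3⟩ := enc_dec grid y x d hv
  obtain ⟨f1, f2, f3⟩ := enc_dec grid y' x' d' hv'
  rw [h] at e1 e2 e3
  omega

def Shape3 (grid : List String) (v : List (List (List Int))) : Prop :=
  v.length = (rOf grid).toNat ∧
  ∀ i : Nat, i < v.length → ((v.getD i []).length = (cOf grid).toNat ∧
      ∀ j : Nat, j < (v.getD i []).length → ((v.getD i []).getD j []).length = 4)

theorem getD_replicate' {α : Type} (n i : Nat) (a d : α) :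
    (List.replicate n a).getD i d = if i < n then a else d := by
  by_cases h : i < n
  · rw [List.getD_eq_getElem _ _ (by simpa using h)]; simp [h]
  · rw [List.getD_eq_default _ _ (by simpa using Nat.le_of_not_lt h)]; simp [h]

theorem shape_v0 (grid : List String) :
    Shape3 grid (List.replicate (rOf grid).toNat
      (List.replicate (cOf grid).toNat (List.replicate 4 (-1 : Int)))) := by
  refine ⟨by simp, ?_⟩
  intro i hi
  simp only [List.length_replicate] at hi
  rw [List.getD_eq_getElem _ _ (by simpa using hi)]
  simp only [List.getElem_replicate, List.length_replicate]
  refine ⟨by simp, ?_⟩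
  intro j hj
  rw [getD_replicate']
  simp [hj]

theorem vget_v0 (grid : List String) (y x d : Int) :
    pvVget (List.replicate (rOf grid).toNat
      (List.replicate (cOf grid).toNat (List.replicate 4 (-1 : Int)))) y x d = -1 := by
  unfold pvVget
  rw [getD_replicate']
  split_ifs with h1
  · rw [getD_replicate']
    split_ifs with h2
    · rw [getD_replicate']
      split_ifs <;> rfl
    · rfl
  · rfl

theorem shape_vset (grid : List String) (v : List (List (List Int))) (y x d a : Int)
    (hsh : Shape3 grid v) : Shape3 grid (pvVset v y x d a) := by
  obtain ⟨hlen, hrows⟩ := hsh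
  unfold pvVset
  refine ⟨by simpa using hlen, ?_⟩
  intro i hi
  simp only [List.length_modify] at hi
  rw [getD_modify]
  split_ifs with h
  · obtain ⟨hrl, hcl⟩ := hrows i hi
    refine ⟨by simpa using hrl, ?_⟩
    intro j hj
    simp only [List.length_modify] at hj
    rw [getD_modify]
    split_ifs with h2
    · simpa using hcl j hj
    · exact hcl j hj
  · exact hrows i hi

theorem vget_vset (grid : List String) (v : List (List (List Int))) (y x d y' x' d' a : Int)
    (hsh : Shape3 grid v) (hv : ValidT grid y x d) (hv' : ValidT grid y' x' d') :
    pvVget (pvVset v y x d a) y' x' d' =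
      if y = y' ∧ x = x' ∧ d = d' then a else pvVget v y' x' d' := by
  obtain ⟨hy0, hy1, hx0, hx1, hd0, hd1⟩ := hv
  obtain ⟨hy0', hy1', hx0', hx1', hd0', hd1'⟩ := hv'
  obtain ⟨hlen, hrows⟩ := hsh
  have hyr : y.toNat < v.length := by omega
  have hyr' : y'.toNat < v.length := by omega
  unfold pvVget pvVset
  rw [getD_modify]
  by_cases hy : y = y'
  · subst hy
    rw [if_pos ⟨rfl, hyr'⟩]
    obtain ⟨hrl, hcl⟩ := hrows y.toNat hyr'
    have hxr : x.toNat < (v.getD y.toNat []).length := by omega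
    have hxr' : x'.toNat < (v.getD y.toNat []).length := by omega
    rw [getD_modify]
    by_cases hx : x = x'
    · subst hx
      rw [if_pos ⟨rfl, hxr'⟩]
      have hdl := hcl x.toNat hxr'
      have hdr' : d'.toNat < ((v.getD y.toNat []).getD x.toNat []).length := by omega
      rw [getD_set]
      by_cases hd : d = d'
      · subst hd
        rw [if_pos ⟨rfl, hdr'⟩]
        simp
      · rw [if_neg (by intro h; exact hd (by omega)), if_neg (by intro h; exact hd h.2.2)]
    · rw [if_neg (by intro h; exact hx (by omega)), if_neg (by intro h; exact hx h.2.1)]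
  · rw [if_neg (by intro h; exact hy (by omega)), if_neg (by intro h; exact hy h.1)]

def VRep (grid : List String) (v : List (List (List Int))) (m : Int → Int) : Prop :=
  Shape3 grid v ∧ ∀ y x d : Int, ValidT grid y x d → pvVget v y x d = m (encS grid y x d)

theorem vrep_update (grid : List String) (v : List (List (List Int))) (m : Int → Int)
    (y x d a : Int) (hrep : VRep grid v m) (hv : ValidT grid y x d) :
    VRep grid (pvVset v y x d a)
      (fun t => if t = encS grid y x d then a else m t) := by
  obtain ⟨hsh, hm⟩ := hrep
  refine ⟨shape_vset grid v y x d a hsh, ?_⟩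
  intro y' x' d' hv'
  rw [vget_vset grid v y x d y' x' d' a hsh hv hv']
  by_cases h : y = y' ∧ x = x' ∧ d = d'
  · obtain ⟨rfl, rfl, rfl⟩ := h
    simp
  · rw [if_neg h]
    show pvVget v y' x' d' =
      if encS grid y' x' d' = encS grid y x d then a else m (encS grid y' x' d')
    rw [if_neg ?_, hm _ _ _ hv']
    intro he
    obtain ⟨e1, e2, e3⟩ := encS_inj grid y' x' d' y x d hv' hv he
    exact h ⟨e1.symm, e2.symm, e3.symm⟩

theorem not_W_iterate (grid : List String) (s : Int) (W : Int → Prop)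
    (hc : 0 < cOf grid) (hs : InSt grid s)
    (hWcl : ∀ t, InSt grid t → W (stF grid t) → W t) (hsW : ¬ W s) :
    ∀ j : Nat, ¬ W ((stF grid)^[j] s) := by
  intro j
  induction j with
  | zero => simpa using hsW
  | succ j ih =>
      intro h
      rw [Function.iterate_succ_apply'] at h
      exact ih (hWcl _ (iterate_inSt grid s hc hs j) h)

theorem bfs_run (grid : List String) (s : Int) (p : Nat)
    (hc : 0 < cOf grid) (hs : InSt grid s)
    (W : Int → Prop)
    (hWcl : ∀ t, InSt grid t → W (stF grid t) → W t)
    (hsW : ¬ W s)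
    (hpeq : (stF grid)^[p] s = s)
    (hmin : ∀ k, 0 < k → k < p → (stF grid)^[k] s ≠ s) :
    ∀ (fuel : Nat) (k : Nat), 1 ≤ k → k ≤ p → p - k < fuel →
    ∀ (y x d : Int), ValidT grid y x d → encS grid y x d = (stF grid)^[k-1] s →
    ∀ v m, VRep grid v m →
      (∀ t, ¬ W t → (∀ j : Nat, j < k → t ≠ (stF grid)^[j] s) → m t = -1) →
      (∀ j : Nat, j < k → m ((stF grid)^[j] s) = (j : Int) + 1) →
      (∀ t, W t → m t ≠ -1) →
      ∃ v' m', pvBfs grid (rOf grid) (cOf grid) fuel [(y, x, d)] v = ((p : Int), v') ∧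
        VRep grid v' m' ∧
        (∀ t, m' t = -1 ↔ (m t = -1 ∧ ¬∃ j : Nat, k ≤ j ∧ j < p ∧ t = (stF grid)^[j] s)) := by
  intro fuel
  induction fuel with
  | zero => intro k _ _ h; omega
  | succ fuel ih =>
      intro k hk1 hkp hfuel y x d hv henc v m hrep hout hpre hWmk
      have hr : 0 < rOf grid := by obtain ⟨_, _, _, h, _⟩ := hv; omega
      have hnotW := not_W_iterate grid s W hc hs hWcl hsW
      have hval' := aStep_valid grid y x d hr hc hv.2.2.2.2.1 hv.2.2.2.2.2
      have hstep : (stF grid) ((stF grid)^[k-1] s) = (stF grid)^[k] s := by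
        conv_rhs => rw [show k = (k-1)+1 by omega]
        rw [Function.iterate_succ_apply']
      have hnext : encS grid (aStep grid (rOf grid) (cOf grid) y x d).1
          (aStep grid (rOf grid) (cOf grid) y x d).2.1
          (aStep grid (rOf grid) (cOf grid) y x d).2.2 = (stF grid)^[k] s := by
        rw [← stF_encS grid y x d hv, henc, hstep]
      have hcurval : pvVget v y x d = (k : Int) := by
        rw [hrep.2 y x d hv, henc, hpre (k-1) (by omega)]
        push_cast [Nat.cast_sub hk1]
        ring
      have hnextval : pvVget v (aStep grid (rOf grid) (cOf grid) y x d).1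
          (aStep grid (rOf grid) (cOf grid) y x d).2.1
          (aStep grid (rOf grid) (cOf grid) y x d).2.2 = m ((stF grid)^[k] s) := by
        rw [hrep.2 _ _ _ hval', hnext]
      rw [pvBfs_cons]
      by_cases hk : k = p
      · -- the walk closes: the next state is s, already marked 1
        have hms : m ((stF grid)^[k] s) = 1 := by
          rw [hk, hpeq]
          have h0 := hpre 0 (by omega)
          simpa using h0
        rw [if_neg (by rw [hnextval, hms]; norm_num)]
        refine ⟨v, m, by rw [hcurval, hk], hrep, ?_⟩
        intro t
        constructor
        · intro h; exact ⟨h, by rintro ⟨j, hj1, hj2, _⟩; omega⟩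
        · intro h; exact h.1
      · -- k < p: the next state is unmarked; mark it and continue
        have hkp' : k < p := by omega
        have hmnext : m ((stF grid)^[k] s) = -1 := by
          apply hout _ (hnotW k)
          intro j hj h
          rcases Nat.eq_zero_or_pos j with rfl | hj0
          · exact hmin k (by omega) hkp' (by simpa using h)
          · exact orbit_distinct grid s p hc hs hmin j k hj hkp' h.symm
        rw [if_pos (by rw [hnextval, hmnext])]
        have hrep1 := vrep_update grid v m (aStep grid (rOf grid) (cOf grid) y x d).1
          (aStep grid (rOf grid) (cOf grid) y x d).2.1
          (aStep grid (rOf grid) (cOf grid) y x d).2.2 (pvVget v y x d + 1) hrep hval'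
        have hfeq : (fun t => if t = encS grid (aStep grid (rOf grid) (cOf grid) y x d).1
            (aStep grid (rOf grid) (cOf grid) y x d).2.1
            (aStep grid (rOf grid) (cOf grid) y x d).2.2 then pvVget v y x d + 1 else m t) =
            (fun t => if t = (stF grid)^[k] s then (k : Int) + 1 else m t) := by
          funext t
          rw [hnext, hcurval]
        rw [hfeq] at hrep1
        have hdist : ∀ j : Nat, j < k → (stF grid)^[j] s ≠ (stF grid)^[k] s := by
          intro j hj
          rcases Nat.eq_zero_or_pos j with rfl | hj0
          · intro h; exact hmin k (by omega) hkp' (by simpa using h.symm)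
          · exact orbit_distinct grid s p hc hs hmin j k hj hkp'
        obtain ⟨v', m', hrun, hrep', hchar⟩ := ih (k + 1) (by omega) (by omega) (by omega)
          (aStep grid (rOf grid) (cOf grid) y x d).1
          (aStep grid (rOf grid) (cOf grid) y x d).2.1
          (aStep grid (rOf grid) (cOf grid) y x d).2.2 hval' (by rw [hnext]; congr 1)
          (pvVset v (aStep grid (rOf grid) (cOf grid) y x d).1
            (aStep grid (rOf grid) (cOf grid) y x d).2.1
            (aStep grid (rOf grid) (cOf grid) y x d).2.2 (pvVget v y x d + 1))
          (fun t => if t = (stF grid)^[k] s then (k : Int) + 1 else m t) hrep1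
          (by
            intro t hW hjj
            have htk : t ≠ (stF grid)^[k] s := hjj k (by omega)
            simp only [if_neg htk]
            exact hout t hW (fun j hj => hjj j (by omega)))
          (by
            intro j hj
            rcases Nat.lt_or_ge j k with hjk | hjk
            · simp only [if_neg (hdist j hjk)]
              exact hpre j hjk
            · have : j = k := by omega
              subst this
              simp)
          (by
            intro t hW
            have htk : t ≠ (stF grid)^[k] s := fun h => (hnotW k) (h ▸ hW)
            simp only [if_neg htk]
            exact hWmk t hW)
        refine ⟨v', m', by simpa using hrun, hrep', ?_⟩
        intro t
        rw [hchar t]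
        constructor
        · rintro ⟨hm1, hnoj⟩
          have htk : t ≠ (stF grid)^[k] s := by
            intro h
            rw [if_pos h] at hm1
            omega
          rw [if_neg htk] at hm1
          refine ⟨hm1, ?_⟩
          rintro ⟨j, hj1, hj2, hj3⟩
          rcases Nat.eq_or_lt_of_le hj1 with rfl | hj1'
          · exact htk hj3
          · exact hnoj ⟨j, by omega, hj2, hj3⟩
        · rintro ⟨hm, hnoj⟩
          have htk : t ≠ (stF grid)^[k] s := fun h => hnoj ⟨k, le_refl k, hkp', h⟩
          refine ⟨by rw [if_neg htk]; exact hm, ?_⟩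
          rintro ⟨j, hj1, hj2, hj3⟩
          exact hnoj ⟨j, by omega, hj2, hj3⟩

theorem cOf_nonneg (grid : List String) : 0 ≤ cOf grid := by
  unfold cOf
  rw [PySem.Str.len_eq]
  positivity

def bodyA (grid : List String) (st : List (List (List Int)) × List Int) (i j d : Int) :
    List (List (List Int)) × List Int :=
  if pvVget st.1 i j d = -1 then
    (((pvBfs grid (rOf grid) (cOf grid) ((4 * rOf grid * cOf grid).toNat + 1) [(i, j, d)]
        (pvVset st.1 i j d 1))).2,
      st.2 ++ [(pvBfs grid (rOf grid) (cOf grid) ((4 * rOf grid * cOf grid).toNat + 1) [(i, j, d)]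
        (pvVset st.1 i j d 1)).1])
  else st

theorem solutionA_eq (grid : List String) : solution grid =
    PySem.List.sorted ((PySem.List.pyRange 0 (rOf grid) 1).foldl
      (fun st i => (PySem.List.pyRange 0 (cOf grid) 1).foldl
        (fun st j => (PySem.List.pyRange 0 4 1).foldl (fun st d => bodyA grid st i j d) st) st)
      (List.replicate (rOf grid).toNat
        (List.replicate (cOf grid).toNat (List.replicate 4 (-1 : Int))), ([] : List Int))).2
      (fun x => x) false := rfl

-- ============ the orbit relation and minimal periods ============

def sameO (grid : List String) (a b : Int) : Prop :=
  InSt grid a ∧ InSt grid b ∧ ∃ k : Nat, (stF grid)^[k] a = b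

theorem perEx (grid : List String) (s : Int) (hc : 0 < cOf grid) (hs : InSt grid s) :
    ∃ p : Nat, 0 < p ∧ (stF grid)^[p] s = s := by
  obtain ⟨p, h1, _, h3⟩ := exists_return grid s hc hs
  exact ⟨p, h1, h3⟩

def perN (grid : List String) (s : Int) : Nat :=
  if h : 0 < cOf grid ∧ (0 ≤ s ∧ s < nOf grid) then Nat.find (perEx grid s h.1 h.2) else 0

theorem perN_spec (grid : List String) (s : Int) (hc : 0 < cOf grid) (hs : InSt grid s) :
    0 < perN grid s ∧ (stF grid)^[perN grid s] s = s ∧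
      (∀ k, 0 < k → k < perN grid s → (stF grid)^[k] s ≠ s) ∧
      perN grid s ≤ (nOf grid).toNat := by
  have h : 0 < cOf grid ∧ (0 ≤ s ∧ s < nOf grid) := ⟨hc, hs⟩
  unfold perN
  rw [dif_pos h]
  have hspec := Nat.find_spec (perEx grid s h.1 h.2)
  refine ⟨hspec.1, hspec.2, ?_, ?_⟩
  · intro k hk0 hk hkeq
    exact Nat.find_min (perEx grid s h.1 h.2) hk ⟨hk0, hkeq⟩
  · obtain ⟨p, h1, h2, h3⟩ := exists_return grid s hc hs
    exact le_trans (Nat.find_min' _ ⟨h1, h3⟩) h2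

theorem iter_mul_per (grid : List String) (s : Int) (hc : 0 < cOf grid) (hs : InSt grid s) :
    ∀ q : Nat, (stF grid)^[q * perN grid s] s = s := by
  intro q
  induction q with
  | zero => simp
  | succ q ih =>
      have := (perN_spec grid s hc hs).2.1
      rw [show (q + 1) * perN grid s = q * perN grid s + perN grid s by ring,
        Function.iterate_add_apply, this, ih]

theorem iter_mod_per (grid : List String) (s : Int) (k : Nat) (hc : 0 < cOf grid)
    (hs : InSt grid s) : (stF grid)^[k] s = (stF grid)^[k % perN grid s] s := by
  conv_lhs => rw [show k = k % perN grid s + k / perN grid s * perN grid s from by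
    exact (Nat.mod_add_div' k (perN grid s)).symm]
  rw [Function.iterate_add_apply, iter_mul_per grid s hc hs]

theorem sameO_char (grid : List String) (a b : Int) (hc : 0 < cOf grid)
    (h : sameO grid a b) : ∃ j : Nat, j < perN grid a ∧ (stF grid)^[j] a = b := by
  obtain ⟨ha, hb, k, hk⟩ := h
  refine ⟨k % perN grid a, Nat.mod_lt _ (perN_spec grid a hc ha).1, ?_⟩
  rw [← iter_mod_per grid a k hc ha, hk]

theorem sameO_refl (grid : List String) (a : Int) (ha : InSt grid a) : sameO grid a a :=
  ⟨ha, ha, 0, rfl⟩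

theorem sameO_trans (grid : List String) (a b c : Int) (h1 : sameO grid a b)
    (h2 : sameO grid b c) : sameO grid a c := by
  obtain ⟨ha, hb, k1, hk1⟩ := h1
  obtain ⟨_, hc', k2, hk2⟩ := h2
  exact ⟨ha, hc', k2 + k1, by rw [Function.iterate_add_apply, hk1, hk2]⟩

theorem sameO_symm (grid : List String) (a b : Int) (hc : 0 < cOf grid)
    (h : sameO grid a b) : sameO grid b a := by
  obtain ⟨j, hj, hjeq⟩ := sameO_char grid a b hc h
  obtain ⟨ha, hb, _⟩ := h
  obtain ⟨hp0, hpeq, _, _⟩ := perN_spec grid a hc ha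
  refine ⟨hb, ha, perN grid a - j, ?_⟩
  rw [← hjeq, ← Function.iterate_add_apply, show perN grid a - j + j = perN grid a by omega, hpeq]

theorem sameO_stF (grid : List String) (t : Int) (hc : 0 < cOf grid) (ht : InSt grid t) :
    sameO grid t (stF grid t) :=
  ⟨ht, stF_inSt grid t hc ht, 1, rfl⟩

theorem sameO_of_stF_right (grid : List String) (u t : Int) (hc : 0 < cOf grid)
    (ht : InSt grid t) (h : sameO grid u (stF grid t)) : sameO grid u t :=
  sameO_trans grid u (stF grid t) t h (sameO_symm grid t (stF grid t) hc (sameO_stF grid t hc ht))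

-- bounded boolean forms (used inside the characterising lists)
def orbB (grid : List String) (a b : Int) : Bool :=
  (List.range ((nOf grid).toNat + 1)).any (fun k => decide ((stF grid)^[k] a = b))

def repB (grid : List String) (s : Int) : Bool :=
  decide (0 ≤ s ∧ s < nOf grid) && !((PySem.List.pyRange 0 s 1).any (fun t => orbB grid t s))

theorem orbB_iff (grid : List String) (a b : Int) (hc : 0 < cOf grid)
    (ha : InSt grid a) (hb : InSt grid b) : orbB grid a b = true ↔ sameO grid a b := by
  unfold orbB
  rw [List.any_eq_true]
  constructor
  · rintro ⟨k, _, hk⟩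
    exact ⟨ha, hb, k, of_decide_eq_true hk⟩
  · intro h
    obtain ⟨j, hj, hjeq⟩ := sameO_char grid a b hc h
    have hjle := (perN_spec grid a hc ha).2.2.2
    exact ⟨j, List.mem_range.2 (by omega), decide_eq_true hjeq⟩

theorem repB_iff (grid : List String) (s : Int) (hc : 0 < cOf grid) (hs : InSt grid s) :
    repB grid s = true ↔ ∀ t : Int, 0 ≤ t → t < s → ¬ sameO grid t s := by
  unfold repB
  rw [Bool.and_eq_true, Bool.not_eq_true', List.any_eq_false]
  have hs' : 0 ≤ s ∧ s < nOf grid := hs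
  constructor
  · rintro ⟨_, h⟩ t ht0 ht1 hsame
    have htIn : InSt grid t := hsame.1
    exact absurd ((orbB_iff grid t s hc htIn hs).2 hsame)
      (by simpa using h t (PySem.List.mem_pyRange_one.2 ⟨ht0, ht1⟩))
  · intro h
    refine ⟨decide_eq_true hs', ?_⟩
    intro t htmem
    obtain ⟨ht0, ht1⟩ := PySem.List.mem_pyRange_one.1 htmem
    have htIn : InSt grid t := ⟨ht0, by omega⟩
    simp only [Bool.not_eq_true]
    rw [← Bool.not_eq_true]
    intro horb
    exact h t ht0 ht1 ((orbB_iff grid t s hc htIn hs).1 horb)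

def specAns (grid : List String) (a : Int) : List Int :=
  ((PySem.List.pyRange 0 a 1).filter (repB grid)).map (fun s => ((perN grid s : Nat) : Int))

-- ============ A-side invariant ============

def Wp (grid : List String) (a t : Int) : Prop :=
  ∃ u : Int, 0 ≤ u ∧ u < a ∧ sameO grid u t

def AInv (grid : List String) (a : Int) (st : List (List (List Int)) × List Int) : Prop :=
  ∃ m, VRep grid st.1 m ∧ (∀ t, m t = -1 ↔ ¬ Wp grid a t) ∧ st.2 = specAns grid a

theorem Wp_succ (grid : List String) (a t : Int) (ha : 0 ≤ a) :
    Wp grid (a + 1) t ↔ Wp grid a t ∨ sameO grid a t := by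
  constructor
  · rintro ⟨u, h0, h1, hsame⟩
    rcases lt_or_eq_of_le (by omega : u ≤ a) with h | h
    · exact Or.inl ⟨u, h0, h, hsame⟩
    · exact Or.inr (h ▸ hsame)
  · rintro (⟨u, h0, h1, hsame⟩ | hsame)
    · exact ⟨u, h0, by omega, hsame⟩
    · exact ⟨a, ha, by omega, hsame⟩

theorem Wp_stF (grid : List String) (a t : Int) (hc : 0 < cOf grid) (ht : InSt grid t)
    (h : Wp grid a (stF grid t)) : Wp grid a t := by
  obtain ⟨u, h0, h1, hsame⟩ := h
  exact ⟨u, h0, h1, sameO_of_stF_right grid u t hc ht hsame⟩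

theorem stepA (grid : List String) (y x d : Int) (hc : 0 < cOf grid) (hv : ValidT grid y x d)
    (st : List (List (List Int)) × List Int)
    (h : AInv grid (encS grid y x d) st) :
    AInv grid (encS grid y x d + 1) (bodyA grid st y x d) := by
  obtain ⟨m, hrep, hmW, hans⟩ := h
  have hsIn : InSt grid (encS grid y x d) := encS_inSt grid y x d hv
  have he0 : 0 ≤ encS grid y x d := hsIn.1
  have htest : pvVget st.1 y x d = m (encS grid y x d) := hrep.2 y x d hv
  by_cases hW : Wp grid (encS grid y x d) (encS grid y x d)
  · have hA : ¬ pvVget st.1 y x d = -1 := by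
      rw [htest]; intro hmm; exact ((hmW _).1 hmm) hW
    unfold bodyA
    rw [if_neg hA]
    refine ⟨m, hrep, ?_, ?_⟩
    · intro t
      rw [hmW t]
      constructor
      · intro hn hw1
        apply hn
        rcases (Wp_succ grid _ t he0).1 hw1 with h1 | h1
        · exact h1
        · obtain ⟨u, hu0, hu1, husame⟩ := hW
          exact ⟨u, hu0, hu1, sameO_trans grid u _ t husame h1⟩
      · intro hn hw1
        exact hn ((Wp_succ grid _ t he0).2 (Or.inl hw1))
    · rw [hans]
      unfold specAns
      rw [PySem.List.pyRange_one_succ_right he0, List.filter_append, List.filter_cons]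
      have hrepF : repB grid (encS grid y x d) = false := by
        rw [Bool.eq_false_iff]
        intro htrue
        obtain ⟨u, hu0, hu1, husame⟩ := hW
        exact ((repB_iff grid _ hc hsIn).1 htrue) u hu0 hu1 husame
      simp [hrepF]
  · have hA : pvVget st.1 y x d = -1 := by rw [htest]; exact (hmW _).2 hW
    unfold bodyA
    rw [if_pos hA]
    obtain ⟨hp0, hpeq, hmin, hple⟩ := perN_spec grid (encS grid y x d) hc hsIn
    have hWcl : ∀ t, InSt grid t → Wp grid (encS grid y x d) (stF grid t) →
        Wp grid (encS grid y x d) t :=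
      fun t ht hw => Wp_stF grid _ t hc ht hw
    have hrep1 := vrep_update grid st.1 m y x d 1 hrep hv
    obtain ⟨v', m', hrunA, hrep', hchar⟩ :=
      bfs_run grid (encS grid y x d) (perN grid (encS grid y x d)) hc hsIn
        (Wp grid (encS grid y x d)) hWcl hW hpeq hmin
        ((4 * rOf grid * cOf grid).toNat + 1) 1 (le_refl 1) (by omega)
        (by have hn : nOf grid = 4 * rOf grid * cOf grid := rfl; omega)
        y x d hv (by simp)
        (pvVset st.1 y x d 1) (fun t => if t = encS grid y x d then 1 else m t) hrep1
        (by
          intro t hWt hj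
          have hts : t ≠ encS grid y x d := by simpa using hj 0 (by omega)
          simp only [if_neg hts]
          exact (hmW t).2 hWt)
        (by
          intro j hj
          have : j = 0 := by omega
          subst this
          simp)
        (by
          intro t hWt
          have hts : t ≠ encS grid y x d := fun he => hW (he ▸ hWt)
          simp only [if_neg hts]
          intro hcon
          exact ((hmW t).1 hcon) hWt)
    rw [hrunA]
    refine ⟨m', hrep', ?_, ?_⟩
    · intro t
      rw [hchar t]
      constructor
      · rintro ⟨h1, h2⟩ hw
        rcases (Wp_succ grid _ t he0).1 hw with hwa | hsame
        · by_cases hts : t = encS grid y x d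
          · rw [if_pos hts] at h1; omega
          · rw [if_neg hts] at h1; exact ((hmW t).1 h1) hwa
        · obtain ⟨j, hj, hjeq⟩ := sameO_char grid _ t hc hsame
          rcases Nat.eq_zero_or_pos j with rfl | hj0
          · have hts : t = encS grid y x d := by simpa using hjeq.symm
            rw [if_pos hts] at h1; omega
          · exact h2 ⟨j, by omega, hj, hjeq.symm⟩
      · intro hnw
        have hnwa : ¬ Wp grid (encS grid y x d) t :=
          fun hwa => hnw ((Wp_succ grid _ t he0).2 (Or.inl hwa))
        have hnsame : ¬ sameO grid (encS grid y x d) t :=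
          fun hs' => hnw ((Wp_succ grid _ t he0).2 (Or.inr hs'))
        have hts : t ≠ encS grid y x d := by
          intro he; subst he; exact hnsame (sameO_refl grid _ hsIn)
        refine ⟨by rw [if_neg hts]; exact (hmW t).2 hnwa, ?_⟩
        rintro ⟨j, hj1, hj2, hj3⟩
        exact hnsame ⟨hsIn, hj3 ▸ iterate_inSt grid _ hc hsIn j, j, hj3.symm⟩
    · rw [hans]
      unfold specAns
      rw [PySem.List.pyRange_one_succ_right he0, List.filter_append, List.filter_cons]
      have hrepT : repB grid (encS grid y x d) = true :=
        (repB_iff grid _ hc hsIn).2 (fun t ht0 ht1 hsame => hW ⟨t, ht0, ht1, hsame⟩)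
      simp [hrepT]

-- ============ A-side fold chunking ============

theorem chunkA_d (grid : List String) (y x : Int) (hc : 0 < cOf grid)
    (hy0 : 0 ≤ y) (hy1 : y < rOf grid) (hx0 : 0 ≤ x) (hx1 : x < cOf grid)
    (st : List (List (List Int)) × List Int)
    (h : AInv grid (encS grid y x 0) st) :
    AInv grid (encS grid y x 0 + 4)
      ((PySem.List.pyRange 0 4 1).foldl (fun st d => bodyA grid st y x d) st) := by
  have e4 : PySem.List.pyRange 0 4 1 = [0, 1, 2, 3] := by decide
  rw [e4]
  simp only [List.foldl]
  have a1 : encS grid y x 0 + 1 = encS grid y x 1 := by unfold encS; ring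
  have a2 : encS grid y x 1 + 1 = encS grid y x 2 := by unfold encS; ring
  have a3 : encS grid y x 2 + 1 = encS grid y x 3 := by unfold encS; ring
  have k0 := stepA grid y x 0 hc ⟨hy0, hy1, hx0, hx1, by norm_num, by norm_num⟩ st h
  rw [a1] at k0
  have k1 := stepA grid y x 1 hc ⟨hy0, hy1, hx0, hx1, by norm_num, by norm_num⟩ _ k0
  rw [a2] at k1
  have k2 := stepA grid y x 2 hc ⟨hy0, hy1, hx0, hx1, by norm_num, by norm_num⟩ _ k1
  rw [a3] at k2
  have k3 := stepA grid y x 3 hc ⟨hy0, hy1, hx0, hx1, by norm_num, by norm_num⟩ _ k2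
  rw [← a3, ← a2, ← a1,
    show encS grid y x 0 + 1 + 1 + 1 + 1 = encS grid y x 0 + 4 from by ring] at k3
  exact k3

theorem chunkA_row (grid : List String) (y : Int) (hc : 0 < cOf grid)
    (hy0 : 0 ≤ y) (hy1 : y < rOf grid) :
    ∀ (cnt : Nat) (x : Int), 0 ≤ x → x + cnt = cOf grid →
    ∀ (st : List (List (List Int)) × List Int),
    AInv grid (encS grid y x 0) st →
    AInv grid (encS grid (y + 1) 0 0)
      ((PySem.List.pyRange x (cOf grid) 1).foldl
        (fun st j => (PySem.List.pyRange 0 4 1).foldl (fun st d => bodyA grid st y j d) st) st) := by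
  intro cnt
  induction cnt with
  | zero =>
      intro x hx0 hxc st h
      have hxc' : x = cOf grid := by omega
      have e : encS grid y x 0 = encS grid (y + 1) 0 0 := by
        unfold encS; rw [hxc']; ring
      rw [PySem.List.pyRange_one_eq_nil (by omega : cOf grid ≤ x)]
      simp only [List.foldl_nil]
      exact e ▸ h
  | succ cnt ih =>
      intro x hx0 hxc st h
      have hx1 : x < cOf grid := by omega
      have e1 : encS grid y (x + 1) 0 = encS grid y x 0 + 4 := by unfold encS; ring
      rw [PySem.List.pyRange_one_cons hx1, List.foldl_cons]
      have hcd := chunkA_d grid y x hc hy0 hy1 hx0 hx1 st h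
      rw [← e1] at hcd
      exact ih (x + 1) (by omega) (by omega) _ hcd

theorem chunkA_grid (grid : List String) (hc : 0 < cOf grid) :
    ∀ (cnt : Nat) (y : Int), 0 ≤ y → y + cnt = rOf grid →
    ∀ (st : List (List (List Int)) × List Int),
    AInv grid (encS grid y 0 0) st →
    AInv grid (nOf grid)
      ((PySem.List.pyRange y (rOf grid) 1).foldl
        (fun st i => (PySem.List.pyRange 0 (cOf grid) 1).foldl
          (fun st j => (PySem.List.pyRange 0 4 1).foldl (fun st d => bodyA grid st i j d) st) st) st) := by
  intro cnt
  induction cnt with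
  | zero =>
      intro y hy0 hyr st h
      have hyr' : y = rOf grid := by omega
      have e : encS grid y 0 0 = nOf grid := by
        unfold encS nOf; rw [hyr']; ring
      rw [PySem.List.pyRange_one_eq_nil (by omega : rOf grid ≤ y)]
      simp only [List.foldl_nil]
      exact e ▸ h
  | succ cnt ih =>
      intro y hy0 hyr st h
      have hy1 : y < rOf grid := by omega
      rw [PySem.List.pyRange_one_cons hy1, List.foldl_cons]
      have hrow := chunkA_row grid y hc hy0 hy1 (cOf grid).toNat 0 (le_refl 0)
        (by simp [Int.toNat_of_nonneg (cOf_nonneg grid)]) st h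
      exact ih (y + 1) (by omega) (by omega) _ hrow

theorem initA (grid : List String) :
    AInv grid 0
      (List.replicate (rOf grid).toNat
        (List.replicate (cOf grid).toNat (List.replicate 4 (-1 : Int))), ([] : List Int)) := by
  refine ⟨fun _ => -1, ⟨shape_v0 grid, fun y x d _ => vget_v0 grid y x d⟩, ?_, ?_⟩
  · intro t
    constructor
    · rintro _ ⟨u, h0, h1, _⟩; omega
    · intro _; rfl
  · unfold specAns
    rw [PySem.List.pyRange_one_eq_nil (le_refl 0)]
    rfl

theorem solutionA_chars (grid : List String) (hc : 0 < cOf grid) :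
    solution grid = PySem.List.sorted (specAns grid (nOf grid)) (fun x => x) false := by
  have hr0 : (0:Int) ≤ rOf grid := by
    unfold rOf; rw [PySem.List.len_eq]; positivity
  have h0 := initA grid
  have e0 : (0 : Int) = encS grid 0 0 0 := by unfold encS; ring
  rw [e0] at h0
  have hfin := chunkA_grid grid hc (rOf grid).toNat 0 (le_refl 0)
    (by simp [Int.toNat_of_nonneg hr0]) _ h0
  obtain ⟨m, _, _, hans⟩ := hfin
  rw [solutionA_eq, hans]

-- ============ B-side: union-find ============

def rootF (grid : List String) (par : List Int) (a : Int) : Int :=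
  pvFind par (nOf grid).toNat a

def POK (grid : List String) (par : List Int) : Prop :=
  par.length = (nOf grid).toNat ∧
  ∀ a : Int, InSt grid a → 0 ≤ PySem.List.pyGetD par a 0 ∧ PySem.List.pyGetD par a 0 ≤ a

theorem root_of_fix (grid : List String) (par : List Int) (a : Int)
    (hn : 0 < (nOf grid).toNat) (hfix : PySem.List.pyGetD par a 0 = a) :
    rootF grid par a = a := by
  unfold rootF
  obtain ⟨m, hm⟩ := Nat.exists_eq_succ_of_ne_zero (by omega : (nOf grid).toNat ≠ 0)
  rw [hm]
  simp [pvFind, hfix]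

theorem find_go (grid : List String) (par : List Int) (hp : POK grid par) :
    ∀ (k : Nat) (a : Int), InSt grid a → a.toNat ≤ k →
      ∀ fuel : Nat, a.toNat < fuel →
        pvFind par fuel a = rootF grid par a ∧
        PySem.List.pyGetD par (rootF grid par a) 0 = rootF grid par a ∧
        0 ≤ rootF grid par a ∧ rootF grid par a ≤ a := by
  intro k
  induction k with
  | zero =>
      intro a ha hak fuel hfuel
      have ha0 : a = 0 := by obtain ⟨h0, _⟩ := ha; omega
      subst ha0
      obtain ⟨hpa0, hpa1⟩ := hp.2 0 ha
      have hfix : PySem.List.pyGetD par 0 0 = 0 := by omega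
      have hroot : rootF grid par 0 = 0 :=
        root_of_fix grid par 0 (by obtain ⟨_, h⟩ := ha; omega) hfix
      obtain ⟨f, rfl⟩ := Nat.exists_eq_succ_of_ne_zero (by omega : fuel ≠ 0)
      exact ⟨by simp [pvFind, hfix, hroot], by rw [hroot]; exact hfix,
        by rw [hroot], by rw [hroot]⟩
  | succ k ih =>
      intro a ha hak fuel hfuel
      obtain ⟨hpa0, hpa1⟩ := hp.2 a ha
      have hnlt : a.toNat < (nOf grid).toNat := by obtain ⟨h0, h1⟩ := ha; omega
      by_cases hfix : PySem.List.pyGetD par a 0 = a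
      · have hroot := root_of_fix grid par a (by omega) hfix
        obtain ⟨f, rfl⟩ := Nat.exists_eq_succ_of_ne_zero (by omega : fuel ≠ 0)
        exact ⟨by simp [pvFind, hfix, hroot], by rw [hroot]; exact hfix,
          by rw [hroot]; exact ha.1, by rw [hroot]⟩
      · have hpalt : PySem.List.pyGetD par a 0 < a := lt_of_le_of_ne hpa1 hfix
        have hpaIn : InSt grid (PySem.List.pyGetD par a 0) :=
          ⟨hpa0, by obtain ⟨_, h⟩ := ha; omega⟩
        have hpak : (PySem.List.pyGetD par a 0).toNat ≤ k := by
          obtain ⟨h0, _⟩ := ha; omega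
        obtain ⟨f, rfl⟩ := Nat.exists_eq_succ_of_ne_zero (by omega : fuel ≠ 0)
        obtain ⟨m, hm⟩ := Nat.exists_eq_succ_of_ne_zero (by omega : (nOf grid).toNat ≠ 0)
        have hstep1 : pvFind par (f + 1) a = pvFind par f (PySem.List.pyGetD par a 0) := by
          simp [pvFind, hfix]
        have hstep2 : rootF grid par a = pvFind par m (PySem.List.pyGetD par a 0) := by
          unfold rootF; rw [hm]; simp [pvFind, hfix]
        have hflt : (PySem.List.pyGetD par a 0).toNat < f := by
          obtain ⟨h0, _⟩ := ha; omega
        have hmlt : (PySem.List.pyGetD par a 0).toNat < m := by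
          obtain ⟨h0, _⟩ := ha; omega
        have if1 := ih (PySem.List.pyGetD par a 0) hpaIn hpak f hflt
        have if2 := ih (PySem.List.pyGetD par a 0) hpaIn hpak m hmlt
        have hEq : rootF grid par a = rootF grid par (PySem.List.pyGetD par a 0) := by
          rw [hstep2, if2.1]
        refine ⟨?_, ?_, ?_, ?_⟩
        · rw [hstep1, if1.1, ← hEq]
        · rw [hEq]; exact if1.2.1
        · rw [hEq]; exact if1.2.2.1
        · rw [hEq]; exact le_trans if1.2.2.2 (le_of_lt hpalt)

-- root basics, all under POK and InSt
theorem root_fix (grid : List String) (par : List Int) (hp : POK grid par) (a : Int)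
    (ha : InSt grid a) : PySem.List.pyGetD par (rootF grid par a) 0 = rootF grid par a :=
  (find_go grid par hp a.toNat a ha (le_refl _) ((nOf grid).toNat)
    (by obtain ⟨h0, h1⟩ := ha; omega)).2.1

theorem root_le (grid : List String) (par : List Int) (hp : POK grid par) (a : Int)
    (ha : InSt grid a) : 0 ≤ rootF grid par a ∧ rootF grid par a ≤ a :=
  (find_go grid par hp a.toNat a ha (le_refl _) ((nOf grid).toNat)
    (by obtain ⟨h0, h1⟩ := ha; omega)).2.2

theorem root_inSt (grid : List String) (par : List Int) (hp : POK grid par) (a : Int)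
    (ha : InSt grid a) : InSt grid (rootF grid par a) := by
  obtain ⟨h0, h1⟩ := root_le grid par hp a ha
  exact ⟨h0, by obtain ⟨_, h⟩ := ha; omega⟩

theorem root_step (grid : List String) (par : List Int) (hp : POK grid par) (a : Int)
    (ha : InSt grid a) (hne : PySem.List.pyGetD par a 0 ≠ a) :
    rootF grid par a = rootF grid par (PySem.List.pyGetD par a 0) := by
  obtain ⟨hpa0, hpa1⟩ := hp.2 a ha
  have hpalt : PySem.List.pyGetD par a 0 < a := lt_of_le_of_ne hpa1 hne
  have hpaIn : InSt grid (PySem.List.pyGetD par a 0) :=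
    ⟨hpa0, by obtain ⟨_, h⟩ := ha; omega⟩
  have hnlt : a.toNat < (nOf grid).toNat := by obtain ⟨h0, h1⟩ := ha; omega
  obtain ⟨m, hm⟩ := Nat.exists_eq_succ_of_ne_zero (by omega : (nOf grid).toNat ≠ 0)
  have hstep2 : rootF grid par a = pvFind par m (PySem.List.pyGetD par a 0) := by
    unfold rootF; rw [hm]; simp [pvFind, hne]
  rw [hstep2,
    (find_go grid par hp (PySem.List.pyGetD par a 0).toNat _ hpaIn (le_refl _) m
      (by obtain ⟨h0, _⟩ := ha; omega)).1]

theorem root_root (grid : List String) (par : List Int) (hp : POK grid par) (a : Int)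
    (ha : InSt grid a) : rootF grid par (rootF grid par a) = rootF grid par a :=
  root_of_fix grid par _ (by obtain ⟨h0, h1⟩ := ha; omega) (root_fix grid par hp a ha)

-- pySetD/pyGetD interplay on Int indices
theorem pyGetD_pySetD' (par : List Int) (i t v : Int) (h0i : 0 ≤ i)
    (hil : i.toNat < par.length) (h0t : 0 ≤ t) :
    PySem.List.pyGetD (PySem.List.pySetD par i v) t 0 =
      if t = i then v else PySem.List.pyGetD par t 0 := by
  rw [PySem.List.pySetD_of_nonneg par v h0i, PySem.List.pyGetD_of_nonneg _ _ h0t,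
    PySem.List.pyGetD_of_nonneg _ _ h0t, List.getD_eq_getElem?_getD, List.getD_eq_getElem?_getD,
    List.getElem?_set]
  by_cases h : t = i
  · subst h
    simp [show t.toNat = t.toNat from rfl, hil, List.getElem?_eq_getElem hil]
  · have hne : i.toNat ≠ t.toNat := by omega
    simp [hne, h]

-- the union step: the new root map
theorem root_set (grid : List String) (par : List Int) (hp : POK grid par) (lo hi : Int)
    (hlo : InSt grid lo) (hhi : InSt grid hi) (hlt : lo < hi)
    (hloR : rootF grid par lo = lo) (hhiR : rootF grid par hi = hi) :
    POK grid (PySem.List.pySetD par hi lo) ∧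
    ∀ t, InSt grid t → rootF grid (PySem.List.pySetD par hi lo) t =
      (if rootF grid par t = hi then lo else rootF grid par t) := by
  have hn0 : 0 < (nOf grid).toNat := by obtain ⟨h0, h1⟩ := hhi; omega
  have hihl : hi.toNat < par.length := by
    rw [hp.1]; obtain ⟨h0, h1⟩ := hhi; omega
  have hget : ∀ t : Int, 0 ≤ t → PySem.List.pyGetD (PySem.List.pySetD par hi lo) t 0 =
      if t = hi then lo else PySem.List.pyGetD par t 0 :=
    fun t ht => pyGetD_pySetD' par hi t lo hhi.1 hihl ht
  have hPOK' : POK grid (PySem.List.pySetD par hi lo) := by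
    constructor
    · rw [PySem.List.pySetD_of_nonneg par lo hhi.1, List.length_set, hp.1]
    · intro a haIn
      rw [hget a haIn.1]
      split_ifs with h
      · subst h; exact ⟨hlo.1, by omega⟩
      · exact hp.2 a haIn
  refine ⟨hPOK', ?_⟩
  suffices h : ∀ (k : Nat) (t : Int), InSt grid t → t.toNat ≤ k →
      rootF grid (PySem.List.pySetD par hi lo) t =
        (if rootF grid par t = hi then lo else rootF grid par t) from
    fun t ht => h t.toNat t ht (le_refl _)
  intro k
  induction k with
  | zero =>
      intro t ht htk
      have ht0 : t = 0 := by obtain ⟨h0, _⟩ := ht; omega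
      subst ht0
      have hne : (0 : Int) ≠ hi := by have h1 := hlo.1; omega
      obtain ⟨hq0, hq1⟩ := hp.2 0 ht
      have hfix : PySem.List.pyGetD par 0 0 = 0 := by omega
      have hfix' : PySem.List.pyGetD (PySem.List.pySetD par hi lo) 0 0 = 0 := by
        rw [hget 0 (le_refl 0), if_neg hne]; exact hfix
      rw [root_of_fix grid _ 0 hn0 hfix', root_of_fix grid par 0 hn0 hfix, if_neg hne]
  | succ k ih =>
      intro t ht htk
      by_cases hth : t = hi
      · subst hth
        have hgetv : PySem.List.pyGetD (PySem.List.pySetD par t lo) t 0 = lo := by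
          rw [hget t ht.1, if_pos rfl]
        have hs := root_step grid _ hPOK' t ht (by rw [hgetv]; omega)
        rw [hs, hgetv]
        have hlok : lo.toNat ≤ k := by obtain ⟨h0, _⟩ := hlo; omega
        rw [ih lo hlo hlok, hloR, if_neg (by omega : lo ≠ t), hhiR, if_pos rfl]
      · obtain ⟨hq0, hq1⟩ := hp.2 t ht
        by_cases hfix : PySem.List.pyGetD par t 0 = t
        · have hfix' : PySem.List.pyGetD (PySem.List.pySetD par hi lo) t 0 = t := by
            rw [hget t ht.1, if_neg hth]; exact hfix
          rw [root_of_fix grid _ t hn0 hfix', root_of_fix grid par t hn0 hfix, if_neg hth]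
        · have hgetv : PySem.List.pyGetD (PySem.List.pySetD par hi lo) t 0 =
              PySem.List.pyGetD par t 0 := by rw [hget t ht.1, if_neg hth]
          have hpaIn : InSt grid (PySem.List.pyGetD par t 0) :=
            ⟨hq0, by obtain ⟨_, h⟩ := ht; omega⟩
          have hpak : (PySem.List.pyGetD par t 0).toNat ≤ k := by
            obtain ⟨h0, _⟩ := ht
            have : PySem.List.pyGetD par t 0 < t := lt_of_le_of_ne hq1 hfix
            omega
          rw [root_step grid _ hPOK' t ht (by rw [hgetv]; exact hfix), hgetv,
            ih _ hpaIn hpak, root_step grid par hp t ht hfix]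

-- ============ the partial edge relation ============

def Ra (grid : List String) (a u v : Int) : Prop := 0 ≤ u ∧ u < a ∧ v = stF grid u

def Ea (grid : List String) (a : Int) (i j : Int) : Prop := Relation.EqvGen (Ra grid a) i j

theorem Ea_mono (grid : List String) (a b i j : Int) (hab : a ≤ b) (h : Ea grid a i j) :
    Ea grid b i j := by
  induction h with
  | rel u v huv =>
      obtain ⟨h1, h2, h3⟩ := huv
      exact Relation.EqvGen.rel u v ⟨h1, by omega, h3⟩
  | refl u => exact Relation.EqvGen.refl u
  | symm u v _ ih => exact Relation.EqvGen.symm u v ih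
  | trans u v w _ _ ih1 ih2 => exact Relation.EqvGen.trans u v w ih1 ih2

theorem Ea_zero (grid : List String) (i j : Int) : Ea grid 0 i j ↔ i = j := by
  constructor
  · intro h
    induction h with
    | rel u v huv => exact absurd huv (by rintro ⟨h1, h2, _⟩; omega)
    | refl u => rfl
    | symm u v _ ih => omega
    | trans u v w _ _ ih1 ih2 => omega
  · rintro rfl
    exact Relation.EqvGen.refl i

theorem Ea_succ (grid : List String) (s i j : Int) (hs : 0 ≤ s) :
    Ea grid (s + 1) i j ↔
      Ea grid s i j ∨ (Ea grid s i s ∧ Ea grid s (stF grid s) j) ∨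
        (Ea grid s i (stF grid s) ∧ Ea grid s s j) := by
  have Et : ∀ a b c : Int, Ea grid s a b → Ea grid s b c → Ea grid s a c :=
    fun a b c => Relation.EqvGen.trans a b c
  have Es : ∀ a b : Int, Ea grid s a b → Ea grid s b a :=
    fun a b => Relation.EqvGen.symm a b
  constructor
  · intro h
    induction h with
    | rel u v huv =>
        obtain ⟨h0, h1, h3⟩ := huv
        subst h3
        rcases lt_or_eq_of_le (by omega : u ≤ s) with hu | hu
        · exact Or.inl (Relation.EqvGen.rel u _ ⟨h0, hu, rfl⟩)
        · subst hu
          exact Or.inr (Or.inl ⟨Relation.EqvGen.refl u, Relation.EqvGen.refl _⟩)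
    | refl u => exact Or.inl (Relation.EqvGen.refl u)
    | symm u v _ ih =>
        rcases ih with h | ⟨ha, hb⟩ | ⟨ha, hb⟩
        · exact Or.inl (Es _ _ h)
        · exact Or.inr (Or.inr ⟨Es _ _ hb, Es _ _ ha⟩)
        · exact Or.inr (Or.inl ⟨Es _ _ hb, Es _ _ ha⟩)
    | trans u v w _ _ ih1 ih2 =>
        rcases ih1 with h1 | ⟨ha, hb⟩ | ⟨ha, hb⟩ <;>
          rcases ih2 with h2 | ⟨hd, he⟩ | ⟨hd, he⟩
        · exact Or.inl (Et _ _ _ h1 h2)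
        · exact Or.inr (Or.inl ⟨Et _ _ _ h1 hd, he⟩)
        · exact Or.inr (Or.inr ⟨Et _ _ _ h1 hd, he⟩)
        · exact Or.inr (Or.inl ⟨ha, Et _ _ _ hb h2⟩)
        · exact Or.inl (Et _ _ _ ha (Et _ _ _ (Es _ _ (Et _ _ _ hb hd)) he))
        · exact Or.inl (Et _ _ _ ha he)
        · exact Or.inr (Or.inr ⟨ha, Et _ _ _ hb h2⟩)
        · exact Or.inl (Et _ _ _ ha he)
        · exact Or.inr (Or.inr ⟨ha, he⟩)
  · have hedge : Ea grid (s + 1) s (stF grid s) :=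
      Relation.EqvGen.rel s _ ⟨hs, by omega, rfl⟩
    rintro (h | ⟨ha, hb⟩ | ⟨ha, hb⟩)
    · exact Ea_mono grid s (s + 1) _ _ (by omega) h
    · exact Relation.EqvGen.trans _ _ _ (Ea_mono grid s (s + 1) _ _ (by omega) ha)
        (Relation.EqvGen.trans _ _ _ hedge (Ea_mono grid s (s + 1) _ _ (by omega) hb))
    · exact Relation.EqvGen.trans _ _ _ (Ea_mono grid s (s + 1) _ _ (by omega) ha)
        (Relation.EqvGen.trans _ _ _ (Relation.EqvGen.symm _ _ hedge)
          (Ea_mono grid s (s + 1) _ _ (by omega) hb))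

theorem Ea_n_iff_sameO (grid : List String) (i j : Int) (hc : 0 < cOf grid)
    (hi : InSt grid i) (hj : InSt grid j) :
    Ea grid (nOf grid) i j ↔ sameO grid i j := by
  have haux : ∀ a b : Int, Ea grid (nOf grid) a b → a = b ∨ sameO grid a b := by
    intro a b h
    induction h with
      | rel u v huv =>
          obtain ⟨h0, h1, h3⟩ := huv
          subst h3
          exact Or.inr (sameO_stF grid u hc ⟨h0, h1⟩)
      | refl u => exact Or.inl rfl
      | symm u v _ ih =>
          rcases ih with h | h
          · exact Or.inl h.symm
          · exact Or.inr (sameO_symm grid _ _ hc h)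

      | trans u v w _ _ ih1 ih2 =>
          rcases ih1 with h1 | h1 <;> rcases ih2 with h2 | h2
          · exact Or.inl (h1.trans h2)
          · exact Or.inr (h1 ▸ h2)
          · exact Or.inr (h2 ▸ h1)
          · exact Or.inr (sameO_trans grid _ _ _ h1 h2)
  constructor
  · intro h
    rcases haux i j h with rfl | h
    · exact sameO_refl grid i hi
    · exact h
  · rintro ⟨hi', hj', k, hk⟩
    have haux : ∀ m : Nat, Ea grid (nOf grid) i ((stF grid)^[m] i) := by
      intro m
      induction m with
      | zero => exact Relation.EqvGen.refl i
      | succ m ih =>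
          refine Relation.EqvGen.trans _ _ _ ih (Relation.EqvGen.rel _ _ ?_)
          obtain ⟨h0, h1⟩ := iterate_inSt grid i hc hi' m
          exact ⟨h0, h1, Function.iterate_succ_apply' (stF grid) m i⟩
    exact hk ▸ haux k

-- ============ B-side invariant ============

def cntR (grid : List String) (par : List Int) (r : Int) : Int :=
  (((PySem.List.pyRange 0 (nOf grid) 1).filter
      (fun t => decide (rootF grid par t = r))).length : Int)

def UF (grid : List String) (a : Int) (st : List Int × List Int) : Prop :=
  POK grid st.1 ∧ st.2.length = (nOf grid).toNat ∧
  (∀ i j, InSt grid i → InSt grid j →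
    (rootF grid st.1 i = rootF grid st.1 j ↔ Ea grid a i j)) ∧
  (∀ r, InSt grid r → rootF grid st.1 r = r →
    PySem.List.pyGetD st.2 r 0 = cntR grid st.1 r)

def bodyU (grid : List String) (st : List Int × List Int) (s : Int) : List Int × List Int :=
  if rootF grid st.1 s = rootF grid st.1 (stF grid s) then st
  else
    (PySem.List.pySetD st.1 (max (rootF grid st.1 s) (rootF grid st.1 (stF grid s)))
       (min (rootF grid st.1 s) (rootF grid st.1 (stF grid s))),
     PySem.List.pySetD st.2 (min (rootF grid st.1 s) (rootF grid st.1 (stF grid s)))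
       (PySem.List.pyGetD st.2 (min (rootF grid st.1 s) (rootF grid st.1 (stF grid s))) 0 +
        PySem.List.pyGetD st.2 (max (rootF grid st.1 s) (rootF grid st.1 (stF grid s))) 0))

theorem solutionB_eq (grid : List String) : solution_alt grid =
    PySem.List.sorted (((PySem.List.pyRange 0 (nOf grid) 1).filter
      (fun s => PySem.List.pyGetD ((PySem.List.pyRange 0 (nOf grid) 1).foldl (bodyU grid)
          (PySem.List.pyRange 0 (nOf grid) 1, List.replicate (nOf grid).toNat (1 : Int))).1 s 0 == s)).map
      (fun s => PySem.List.pyGetD ((PySem.List.pyRange 0 (nOf grid) 1).foldl (bodyU grid)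
          (PySem.List.pyRange 0 (nOf grid) 1, List.replicate (nOf grid).toNat (1 : Int))).2 s 0))
      (fun x => x) false := rfl

theorem length_filter_or_disj {α : Type} (xs : List α) (p q : α → Prop)
    [DecidablePred p] [DecidablePred q] (h : ∀ x ∈ xs, ¬(p x ∧ q x)) :
    (xs.filter (fun x => decide (p x) || decide (q x))).length =
      (xs.filter (fun x => decide (p x))).length + (xs.filter (fun x => decide (q x))).length := by
  induction xs with
  | nil => rfl
  | cons x xs ih =>
      have hx := h x (List.mem_cons_self)
      have ih' := ih (fun y hy => h y (List.mem_cons_of_mem x hy))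
      by_cases hp : p x
      · by_cases hq : q x
        · exact absurd ⟨hp, hq⟩ hx
        · simp [List.filter_cons, hp, hq, ih']; omega
      · by_cases hq : q x
        · simp [List.filter_cons, hp, hq, ih']; omega
        · simp [List.filter_cons, hp, hq, ih']

theorem par0_get (grid : List String) (a : Int) (ha : InSt grid a) :
    PySem.List.pyGetD (PySem.List.pyRange 0 (nOf grid) 1) a 0 = a := by
  obtain ⟨h0, h1⟩ := ha
  rw [PySem.List.pyGetD_of_nonneg _ _ h0,
    List.getD_eq_getElem _ _ (by rw [PySem.List.length_pyRange_one]; omega),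
    PySem.List.getElem_pyRange_one]
  omega

theorem root0 (grid : List String) (a : Int) (ha : InSt grid a) :
    rootF grid (PySem.List.pyRange 0 (nOf grid) 1) a = a :=
  root_of_fix grid _ a (by obtain ⟨h0, h1⟩ := ha; omega) (par0_get grid a ha)

theorem filter_eq_singleton (r n' : Int) (h0 : 0 ≤ r) (h1 : r < n') :
    (PySem.List.pyRange 0 n' 1).filter (fun t => decide (t = r)) = [r] := by
  rw [PySem.List.pyRange_one_append 0 r n' h0 (by omega), PySem.List.pyRange_one_cons h1,
    List.filter_append, List.filter_cons]
  rw [List.filter_eq_nil_iff.2 (fun a ha => by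
      have := PySem.List.mem_pyRange_one.1 ha; simp; omega),
    List.filter_eq_nil_iff.2 (fun a ha => by
      have := PySem.List.mem_pyRange_one.1 ha; simp; omega)]
  simp

theorem stepU (grid : List String) (s : Int) (hc : 0 < cOf grid) (hsIn : InSt grid s)
    (st : List Int × List Int) (h : UF grid s st) : UF grid (s + 1) (bodyU grid st s) := by
  obtain ⟨hPOK, hslen, hiff, hsz⟩ := h
  have hfsIn : InSt grid (stF grid s) := stF_inSt grid s hc hsIn
  have hraIn : InSt grid (rootF grid st.1 s) := root_inSt grid st.1 hPOK s hsIn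
  have hrbIn : InSt grid (rootF grid st.1 (stF grid s)) :=
    root_inSt grid st.1 hPOK (stF grid s) hfsIn
  have hraR : rootF grid st.1 (rootF grid st.1 s) = rootF grid st.1 s :=
    root_root grid st.1 hPOK s hsIn
  have hrbR : rootF grid st.1 (rootF grid st.1 (stF grid s)) = rootF grid st.1 (stF grid s) :=
    root_root grid st.1 hPOK (stF grid s) hfsIn
  unfold bodyU
  by_cases heq : rootF grid st.1 s = rootF grid st.1 (stF grid s)
  · rw [if_pos heq]
    have hEsfs : Ea grid s s (stF grid s) := (hiff s (stF grid s) hsIn hfsIn).1 heq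
    refine ⟨hPOK, hslen, ?_, hsz⟩
    intro i j hi hj
    rw [hiff i j hi hj, Ea_succ grid s i j hsIn.1]
    constructor
    · exact fun h1 => Or.inl h1
    · rintro (h1 | ⟨h1, h2⟩ | ⟨h1, h2⟩)
      · exact h1
      · exact Relation.EqvGen.trans _ _ _ h1 (Relation.EqvGen.trans _ _ _ hEsfs h2)
      · exact Relation.EqvGen.trans _ _ _ h1
          (Relation.EqvGen.trans _ _ _ (Relation.EqvGen.symm _ _ hEsfs) h2)
  · rw [if_neg heq]
    have hlt : min (rootF grid st.1 s) (rootF grid st.1 (stF grid s)) <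
        max (rootF grid st.1 s) (rootF grid st.1 (stF grid s)) := by
      rcases le_total (rootF grid st.1 s) (rootF grid st.1 (stF grid s)) with h | h
      · rw [min_eq_left h, max_eq_right h]; omega
      · rw [min_eq_right h, max_eq_left h]; omega
    have hcases : (min (rootF grid st.1 s) (rootF grid st.1 (stF grid s)) = rootF grid st.1 s ∧
          max (rootF grid st.1 s) (rootF grid st.1 (stF grid s)) = rootF grid st.1 (stF grid s)) ∨
        (min (rootF grid st.1 s) (rootF grid st.1 (stF grid s)) = rootF grid st.1 (stF grid s) ∧
          max (rootF grid st.1 s) (rootF grid st.1 (stF grid s)) = rootF grid st.1 s) := by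
      rcases le_total (rootF grid st.1 s) (rootF grid st.1 (stF grid s)) with h | h
      · exact Or.inl ⟨min_eq_left h, max_eq_right h⟩
      · exact Or.inr ⟨min_eq_right h, max_eq_left h⟩
    have hloIn : InSt grid (min (rootF grid st.1 s) (rootF grid st.1 (stF grid s))) := by
      rcases hcases with ⟨h1, _⟩ | ⟨h1, _⟩ <;> rw [h1] <;> assumption
    have hhiIn : InSt grid (max (rootF grid st.1 s) (rootF grid st.1 (stF grid s))) := by
      rcases hcases with ⟨_, h1⟩ | ⟨_, h1⟩ <;> rw [h1] <;> assumption
    have hloR : rootF grid st.1 (min (rootF grid st.1 s) (rootF grid st.1 (stF grid s))) =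
        min (rootF grid st.1 s) (rootF grid st.1 (stF grid s)) := by
      rcases hcases with ⟨h1, _⟩ | ⟨h1, _⟩ <;> rw [h1] <;> assumption
    have hhiR : rootF grid st.1 (max (rootF grid st.1 s) (rootF grid st.1 (stF grid s))) =
        max (rootF grid st.1 s) (rootF grid st.1 (stF grid s)) := by
      rcases hcases with ⟨_, h1⟩ | ⟨_, h1⟩ <;> rw [h1] <;> assumption
    obtain ⟨hPOK', hmap⟩ := root_set grid st.1 hPOK _ _ hloIn hhiIn hlt hloR hhiR
    have hEis : ∀ i, InSt grid i → (Ea grid s i s ↔ rootF grid st.1 i = rootF grid st.1 s) :=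
      fun i hi => (hiff i s hi hsIn).symm
    refine ⟨hPOK', ?_, ?_, ?_⟩
    · rw [PySem.List.pySetD_of_nonneg _ _ hloIn.1, List.length_set, hslen]
    · intro i j hi hj
      rw [hmap i hi, hmap j hj, Ea_succ grid s i j hsIn.1,
        ← hiff i j hi hj, ← hiff i s hi hsIn, ← hiff (stF grid s) j hfsIn hj,
        ← hiff i (stF grid s) hi hfsIn, ← hiff s j hsIn hj]
      rcases hcases with ⟨h1, h2⟩ | ⟨h1, h2⟩ <;> rw [h1, h2] <;> split_ifs <;>
        constructor <;> intro hgoal <;> omega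
    · intro r hr hroot
      have hrnh : rootF grid st.1 r = r ∧
          r ≠ max (rootF grid st.1 s) (rootF grid st.1 (stF grid s)) := by
        have hm := hmap r hr
        by_cases hrh : rootF grid st.1 r = max (rootF grid st.1 s) (rootF grid st.1 (stF grid s))
        · rw [hm, if_pos hrh] at hroot
          exfalso
          rw [← hroot] at hrh
          rw [hloR] at hrh
          omega
        · rw [hm, if_neg hrh] at hroot
          constructor
          · exact hroot
          · intro hcon
            rw [hcon] at hroot hrh
            exact hrh (hroot.symm ▸ hhiR ▸ rfl)
      obtain ⟨hrfix, hrneh⟩ := hrnh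
      have hloL : (min (rootF grid st.1 s) (rootF grid st.1 (stF grid s))).toNat < st.2.length := by
        rw [hslen]; obtain ⟨h0, h1⟩ := hloIn; omega
      have hgets :
          PySem.List.pyGetD (PySem.List.pySetD st.2
            (min (rootF grid st.1 s) (rootF grid st.1 (stF grid s)))
            (PySem.List.pyGetD st.2 (min (rootF grid st.1 s) (rootF grid st.1 (stF grid s))) 0 +
             PySem.List.pyGetD st.2 (max (rootF grid st.1 s) (rootF grid st.1 (stF grid s))) 0)) r 0 =
          if r = min (rootF grid st.1 s) (rootF grid st.1 (stF grid s)) then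
            PySem.List.pyGetD st.2 (min (rootF grid st.1 s) (rootF grid st.1 (stF grid s))) 0 +
            PySem.List.pyGetD st.2 (max (rootF grid st.1 s) (rootF grid st.1 (stF grid s))) 0
          else PySem.List.pyGetD st.2 r 0 :=
        pyGetD_pySetD' st.2 _ r _ hloIn.1 hloL hr.1
      rw [hgets]
      by_cases hrl : r = min (rootF grid st.1 s) (rootF grid st.1 (stF grid s))
      · subst hrl
        rw [if_pos rfl]
        have hcnt : cntR grid (PySem.List.pySetD st.1
              (max (rootF grid st.1 s) (rootF grid st.1 (stF grid s)))
              (min (rootF grid st.1 s) (rootF grid st.1 (stF grid s))))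
              (min (rootF grid st.1 s) (rootF grid st.1 (stF grid s))) =
            cntR grid st.1 (min (rootF grid st.1 s) (rootF grid st.1 (stF grid s))) +
            cntR grid st.1 (max (rootF grid st.1 s) (rootF grid st.1 (stF grid s))) := by
          unfold cntR
          rw [List.filter_congr (fun t ht => by
            have htIn : InSt grid t := by
              have := PySem.List.mem_pyRange_one.1 ht
              exact ⟨this.1, this.2⟩
            simp only [hmap t htIn]
            split_ifs with hcond
            · simp [hcond]
            · simp [hcond] :
            ∀ t ∈ PySem.List.pyRange 0 (nOf grid) 1, _ = (fun t =>
              decide (rootF grid st.1 t = min (rootF grid st.1 s) (rootF grid st.1 (stF grid s))) ||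
              decide (rootF grid st.1 t = max (rootF grid st.1 s) (rootF grid st.1 (stF grid s)))) t)]
          rw [length_filter_or_disj _ _ _ (fun t _ hand => by omega)]
          push_cast
          ring
        rw [hcnt, hsz _ hloIn hloR, hsz _ hhiIn hhiR]
      · rw [if_neg hrl]
        have hcnt : cntR grid (PySem.List.pySetD st.1
              (max (rootF grid st.1 s) (rootF grid st.1 (stF grid s)))
              (min (rootF grid st.1 s) (rootF grid st.1 (stF grid s)))) r =
            cntR grid st.1 r := by
          unfold cntR
          rw [List.filter_congr (fun t ht => by
            have htIn : InSt grid t := by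
              have := PySem.List.mem_pyRange_one.1 ht
              exact ⟨this.1, this.2⟩
            simp only [hmap t htIn]
            split_ifs with hcond
            · rw [hcond]
              apply decide_eq_decide.2
              constructor <;> intro <;> omega
            · rfl :
            ∀ t ∈ PySem.List.pyRange 0 (nOf grid) 1, _ = (fun t =>
              decide (rootF grid st.1 t = r)) t)]
        rw [hcnt]
        exact hsz r hr hrfix

theorem initU (grid : List String) :
    UF grid 0 (PySem.List.pyRange 0 (nOf grid) 1, List.replicate (nOf grid).toNat (1 : Int)) := by
  have hPOK : POK grid (PySem.List.pyRange 0 (nOf grid) 1) := by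
    refine ⟨by rw [PySem.List.length_pyRange_one]; norm_num, ?_⟩
    intro a ha
    rw [par0_get grid a ha]
    exact ⟨ha.1, le_refl a⟩
  refine ⟨hPOK, by simp, ?_, ?_⟩
  · intro i j hi hj
    rw [root0 grid i hi, root0 grid j hj]
    exact (Ea_zero grid i j).symm
  · intro r hr hroot
    obtain ⟨hr0, hr1⟩ := hr
    have hL : PySem.List.pyGetD (List.replicate (nOf grid).toNat (1 : Int)) r 0 = 1 := by
      rw [PySem.List.pyGetD_of_nonneg _ _ hr0, getD_replicate']
      rw [if_pos (by omega)]
    rw [hL]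
    unfold cntR
    rw [List.filter_congr (fun t ht => by
      have htIn : InSt grid t := by
        have := PySem.List.mem_pyRange_one.1 ht
        exact ⟨this.1, this.2⟩
      simp only [root0 grid t htIn] : ∀ t ∈ PySem.List.pyRange 0 (nOf grid) 1,
        (fun t => decide (rootF grid (PySem.List.pyRange 0 (nOf grid) 1) t = r)) t =
          (fun t => decide (t = r)) t)]
    rw [filter_eq_singleton r (nOf grid) hr0 hr1]
    rfl

theorem chunkU (grid : List String) (hc : 0 < cOf grid) :
    ∀ (cnt : Nat) (a : Int), 0 ≤ a → a + cnt = nOf grid →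
    ∀ st, UF grid a st → UF grid (nOf grid) ((PySem.List.pyRange a (nOf grid) 1).foldl (bodyU grid) st) := by
  intro cnt
  induction cnt with
  | zero =>
      intro a ha0 hac st h
      rw [PySem.List.pyRange_one_eq_nil (by omega : nOf grid ≤ a)]
      simpa using (by omega : a = nOf grid) ▸ h
  | succ cnt ih =>
      intro a ha0 hac st h
      have ha1 : a < nOf grid := by omega
      rw [PySem.List.pyRange_one_cons ha1, List.foldl_cons]
      exact ih (a + 1) (by omega) (by omega) _ (stepU grid a hc ⟨ha0, ha1⟩ st h)

-- orbit counting: the class of an orbit-minimal state has exactly perN members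
theorem cnt_orbit (grid : List String) (s : Int) (hc : 0 < cOf grid) (hs : InSt grid s) :
    ((PySem.List.pyRange 0 (nOf grid) 1).filter
      (fun t => orbB grid s t)).length = perN grid s := by
  obtain ⟨hp0, hpeq, hmin, hple⟩ := perN_spec grid s hc hs
  have hinj : ∀ a ∈ List.range (perN grid s), ∀ b ∈ List.range (perN grid s),
      (stF grid)^[a] s = (stF grid)^[b] s → a = b := by
    intro a ha b hb hab
    rcases lt_trichotomy a b with h | h | h
    · exact absurd hab (orbit_distinct grid s _ hc hs hmin a b h (List.mem_range.1 hb))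
    · exact h
    · exact absurd hab.symm (orbit_distinct grid s _ hc hs hmin b a h (List.mem_range.1 ha))
  have hnd1 : ((List.range (perN grid s)).map (fun j => (stF grid)^[j] s)).Nodup :=
    (List.nodup_map_iff_inj_on List.nodup_range).mpr hinj
  have hnd2 : ((PySem.List.pyRange 0 (nOf grid) 1).filter (fun t => orbB grid s t)).Nodup :=
    List.Nodup.filter _ (PySem.List.nodup_pyRange_one 0 (nOf grid))
  have hmem : ∀ t : Int,
      t ∈ (PySem.List.pyRange 0 (nOf grid) 1).filter (fun t => orbB grid s t) ↔
      t ∈ (List.range (perN grid s)).map (fun j => (stF grid)^[j] s) := by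
    intro t
    rw [List.mem_filter, List.mem_map]
    constructor
    · rintro ⟨htr, horb⟩
      have htIn : InSt grid t := by
        have := PySem.List.mem_pyRange_one.1 htr
        exact ⟨this.1, this.2⟩
      obtain ⟨j, hj, hjeq⟩ := sameO_char grid s t hc ((orbB_iff grid s t hc hs htIn).1 horb)
      exact ⟨j, List.mem_range.2 hj, hjeq⟩
    · rintro ⟨j, hj, hjeq⟩
      have htIn : InSt grid t := hjeq ▸ iterate_inSt grid s hc hs j
      refine ⟨PySem.List.mem_pyRange_one.2 ⟨htIn.1, htIn.2⟩, ?_⟩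
      exact (orbB_iff grid s t hc hs htIn).2 ⟨hs, htIn, j, hjeq⟩
  have hperm := (List.perm_ext_iff_of_nodup hnd2 hnd1).2 hmem
  rw [hperm.length_eq]
  simp

theorem solutionB_chars (grid : List String) (hc : 0 < cOf grid) :
    solution_alt grid = PySem.List.sorted (specAns grid (nOf grid)) (fun x => x) false := by
  have hr0 : (0:Int) ≤ rOf grid := by unfold rOf; rw [PySem.List.len_eq]; positivity
  have hn0 : (0:Int) ≤ nOf grid := by unfold nOf; nlinarith [cOf_nonneg grid]
  rw [solutionB_eq]
  obtain ⟨hPOK, hslen, hiff, hsz⟩ := chunkU grid hc (nOf grid).toNat 0 (le_refl 0)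
    (by omega) _ (initU grid)
  congr 1
  have hroot_iff : ∀ s : Int, InSt grid s →
      (rootF grid ((PySem.List.pyRange 0 (nOf grid) 1).foldl (bodyU grid)
          (PySem.List.pyRange 0 (nOf grid) 1, List.replicate (nOf grid).toNat (1 : Int))).1 s = s ↔
        ∀ t : Int, 0 ≤ t → t < s → ¬ sameO grid t s) := by
    intro s hsIn
    constructor
    · intro h t ht0 ht1 hsame
      have htIn : InSt grid t := hsame.1
      have hEa := (Ea_n_iff_sameO grid t s hc htIn hsIn).2 hsame
      have := (hiff t s htIn hsIn).2 hEa
      obtain ⟨hrle0, hrle⟩ := root_le grid _ hPOK t htIn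
      rw [h] at this
      omega
    · intro h
      by_contra hne
      obtain ⟨hrle0, hrle⟩ := root_le grid _ hPOK s hsIn
      have hrlt : rootF grid _ s < s := lt_of_le_of_ne hrle hne
      have hrIn : InSt grid (rootF grid _ s) := root_inSt grid _ hPOK s hsIn
      have hreq : rootF grid _ (rootF grid _ s) = rootF grid _ s :=
        root_root grid _ hPOK s hsIn
      have hEa := (hiff _ s hrIn hsIn).1 hreq
      exact h _ hrle0 hrlt ((Ea_n_iff_sameO grid _ s hc hrIn hsIn).1 hEa)
  have hfix_iff : ∀ s : Int, InSt grid s →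
      (PySem.List.pyGetD ((PySem.List.pyRange 0 (nOf grid) 1).foldl (bodyU grid)
          (PySem.List.pyRange 0 (nOf grid) 1, List.replicate (nOf grid).toNat (1 : Int))).1 s 0 = s ↔
        rootF grid ((PySem.List.pyRange 0 (nOf grid) 1).foldl (bodyU grid)
          (PySem.List.pyRange 0 (nOf grid) 1, List.replicate (nOf grid).toNat (1 : Int))).1 s = s) := by
    intro s hsIn
    constructor
    · intro h
      exact root_of_fix grid _ s (by obtain ⟨h0, h1⟩ := hsIn; omega) h
    · intro h
      have := root_fix grid _ hPOK s hsIn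
      rw [h] at this
      exact this
  unfold specAns
  rw [List.filter_congr (fun s hsmem => by
    have hsIn : InSt grid s := by
      have := PySem.List.mem_pyRange_one.1 hsmem
      exact ⟨this.1, this.2⟩
    show (PySem.List.pyGetD _ s 0 == s) = repB grid s
    rw [Bool.eq_iff_iff, beq_iff_eq, repB_iff grid s hc hsIn, hfix_iff s hsIn]
    exact hroot_iff s hsIn)]
  refine List.map_congr_left ?_
  intro s hsmem
  rw [List.mem_filter] at hsmem
  obtain ⟨hsr, hsrep⟩ := hsmem
  have hsIn : InSt grid s := by
    have := PySem.List.mem_pyRange_one.1 hsr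
    exact ⟨this.1, this.2⟩
  have hrfix : rootF grid ((PySem.List.pyRange 0 (nOf grid) 1).foldl (bodyU grid)
      (PySem.List.pyRange 0 (nOf grid) 1, List.replicate (nOf grid).toNat (1 : Int))).1 s = s :=
    (hroot_iff s hsIn).2 ((repB_iff grid s hc hsIn).1 hsrep)
  rw [hsz s hsIn hrfix]
  unfold cntR
  rw [List.filter_congr (fun t htmem => by
    have htIn : InSt grid t := by
      have := PySem.List.mem_pyRange_one.1 htmem
      exact ⟨this.1, this.2⟩
    show decide (rootF grid _ t = s) = orbB grid s t
    rw [Bool.eq_iff_iff, decide_eq_true_iff, orbB_iff grid s t hc hsIn htIn]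
    constructor
    · intro h
      have hEa := (hiff t s htIn hsIn).1 (by rw [h, hrfix])
      exact sameO_symm grid t s hc ((Ea_n_iff_sameO grid t s hc htIn hsIn).1 hEa)
    · intro h
      have hEa := (Ea_n_iff_sameO grid t s hc htIn hsIn).2 (sameO_symm grid s t hc h)
      have := (hiff t s htIn hsIn).2 hEa
      rw [hrfix] at this
      exact this :
    ∀ t ∈ PySem.List.pyRange 0 (nOf grid) 1, _ = (fun t => orbB grid s t) t)]
  rw [cnt_orbit grid s hc hsIn]

-- ============ the degenerate c = 0 case and the final assembly ============

theorem ports_eq (grid : List String) (hpre : Pre_solution grid) :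
    solution grid = solution_alt grid := by
  by_cases hc : 0 < cOf grid
  · rw [solutionA_chars grid hc, solutionB_chars grid hc]
  · have hc0 : cOf grid = 0 := le_antisymm (by omega) (cOf_nonneg grid)
    have hn0 : nOf grid = 0 := by unfold nOf; rw [hc0]; ring
    rw [solutionA_eq, solutionB_eq, hn0, hc0]
    rw [PySem.List.pyRange_one_eq_nil (le_refl 0)]
    simp [PySem.List.foldl_ignore]

-- ===== VERDICT (by name: the statement is the Claim_ definition above) =====
theorem solution_spec : Claim_equal_solution := by
  intro grid _ hpre
  unfold Spec_solution
  exact ports_eq grid hpre
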